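-- pv_equiv track=rewrite | github.com/harveysandiego/foobar | prepare escape.py | solution
-- ===== SOURCE A (Python) =====
-- MOVES = ((1,0),(-1,0),(0,-1),(0,1),)
--
-- def calc_path(start, map):
--     width = len(map[0])
--     height = len(map)
--     path = [[None for x in range(width)] for y in range(height)]
--     path[start[0]][start[1]] = 1
--     curr_location = [start]
--     while curr_location:
--         curr_x, curr_y = curr_location.pop(0)
--         for move in MOVES:
--             new_x = curr_x + move[0]
--             new_y = curr_y + move[1]
--             if 0 <= new_x < height and 0 <= new_y < width:
--                 if path[new_x][new_y] is None:
--                     path[new_x][new_y] = path[curr_x][curr_y] + 1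
--                     if map[new_x][new_y] == 1:
--                         continue
--                     curr_location.append((new_x, new_y))
--     return path
--
-- def solution(map):
--     width = len(map[0])
--     height = len(map)
--     path_forward = calc_path((0,0), map)
--     path_backward = calc_path((height-1,width-1), map)
--
--     result = 4294967295
--     for i in range(height):
--         for j in range(width):
--             if path_forward[i][j] and path_backward[i][j]:
--                 result = min(path_forward[i][j] + path_backward[i][j] - 1, result)
--     return result
-- ===== SOURCE B (Python) =====
-- MOVES = ((1,0),(-1,0),(0,-1),(0,1),)
--
-- def solution(map):
--     width = len(map[0])
--     height = len(map)
--     start = (0, 0)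
--     goal = (height - 1, width - 1)
--     # dist[broke][x][y]: BFS over augmented states (x, y, broke); the entrance and the
--     # exit are always passable (the task guarantees them open), any other wall may be
--     # crossed once, flipping broke from 0 to 1.
--     dist = [[[None] * width for _ in range(height)] for _ in range(2)]
--     dist[0][0][0] = 1
--     frontier = [(0, 0, 0)]
--     level = 1
--     while frontier:
--         level += 1
--         nxt = []
--         for x, y, broke in frontier:
--             for dx, dy in MOVES:
--                 nx, ny = x + dx, y + dy
--                 if not (0 <= nx < height and 0 <= ny < width):
--                     continue
--                 if map[nx][ny] != 1 or (nx, ny) == start or (nx, ny) == goal: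
--                     nb = broke
--                 elif broke == 0:
--                     nb = 1
--                 else:
--                     continue
--                 if dist[nb][nx][ny] is None:
--                     dist[nb][nx][ny] = level
--                     nxt.append((nx, ny, nb))
--         frontier = nxt
--     result = 4294967295
--     for b in (0, 1):
--         d = dist[b][goal[0]][goal[1]]
--         if d:
--             result = min(result, d)
--     return result
-- ===== Notes on version B (the rewrite author's own statement) =====
-- stated objective: alternative
-- what changed: B replaces A's two corner-to-corner BFS distance maps and the min(f+b-1) recombination sweep over all cells by a single BFS over augmented states (row, col, broke), where broke records whether a wall has already been crossed and the entrance/exit cells are always passable.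
-- outside the precondition, e.g. on solution([[1], [1], []]): A returns 3, B raises IndexError; on solution([[1, 1, 1], [1, 1]]): A returns 4294967295, B returns 4294967295
import Mathlib
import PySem

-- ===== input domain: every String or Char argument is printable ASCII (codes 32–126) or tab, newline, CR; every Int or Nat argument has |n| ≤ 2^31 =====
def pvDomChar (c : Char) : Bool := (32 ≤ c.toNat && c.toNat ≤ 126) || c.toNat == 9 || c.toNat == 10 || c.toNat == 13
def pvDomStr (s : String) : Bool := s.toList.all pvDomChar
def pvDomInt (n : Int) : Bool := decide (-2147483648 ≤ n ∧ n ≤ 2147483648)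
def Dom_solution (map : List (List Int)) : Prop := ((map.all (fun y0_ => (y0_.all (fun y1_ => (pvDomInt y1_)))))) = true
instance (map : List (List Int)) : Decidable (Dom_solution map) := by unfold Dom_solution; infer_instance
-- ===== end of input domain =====

-- B replaces A's pair of corner-to-corner BFS distance maps and its combining sweep
-- (min over cells of f+b-1) by a single BFS over augmented states (cell, broke),
-- where broke records whether a wall has already been crossed (endpoints are
-- always passable, as the task guarantees); objective: alternative algorithm.

-- ===== PORT A =====

def pvMoves : List (Int × Int) := [(1, 0), (-1, 0), (0, -1), (0, 1)]

-- path[x][y]; every use is guarded by 0 ≤ x < h and 0 ≤ y < w, so .toNat is exact here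
def pvGet2 (p : List (List (Option Int))) (x y : Int) : Option Int :=
  (((p[x.toNat]?).getD [])[y.toNat]?).getD none

-- path[x][y] = v; guarded in-bounds at every use, so .toNat is exact here
def pvSet2 (p : List (List (Option Int))) (x y : Int) (v : Int) : List (List (Option Int)) :=
  p.modify x.toNat (fun row => row.set y.toNat (some v))

-- map[x][y]; guarded in-bounds (rows long enough inside Pre_), so exact there
def pvMapGet (m : List (List Int)) (x y : Int) : Int :=
  (((m[x.toNat]?).getD [])[y.toNat]?).getD 0

-- body of A's 'for move in MOVES' loop, for one move
def pvMoveA (m : List (List Int)) (h w : Int) (c : Int × Int)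
    (st : List (List (Option Int)) × List (Int × Int)) (mv : Int × Int) :
    List (List (Option Int)) × List (Int × Int) :=
  let nx := c.1 + mv.1
  let ny := c.2 + mv.2
  if 0 ≤ nx ∧ nx < h ∧ 0 ≤ ny ∧ ny < w then
    if pvGet2 st.1 nx ny = none then
      let p' := pvSet2 st.1 nx ny ((pvGet2 st.1 c.1 c.2).getD 0 + 1)
      if pvMapGet m nx ny = 1 then (p', st.2) else (p', st.2 ++ [(nx, ny)])
    else st
  else st

-- process one popped cell: mark the four neighbours, collect the newly enqueued ones
def pvExpandA (m : List (List Int)) (h w : Int) (p : List (List (Option Int))) (c : Int × Int) :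
    List (List (Option Int)) × List (Int × Int) :=
  pvMoves.foldl (pvMoveA m h w c) (p, [])

-- A's 'while curr_location' loop; fuel is a totality guard only (7*h*w+2 exceeds the pop count)
def pvLoopA (m : List (List Int)) (h w : Int) :
    Nat → List (List (Option Int)) → List (Int × Int) → List (List (Option Int))
  | 0, p, _ => p
  | _ + 1, p, [] => p
  | fuel + 1, p, c :: rest =>
    let e := pvExpandA m h w p c
    pvLoopA m h w fuel e.1 (rest ++ e.2)

def pvCalcPath (start : Int × Int) (m : List (List Int)) : List (List (Option Int)) :=
  let width := ((m[0]?).getD []).length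
  let height := m.length
  let path0 := List.replicate height (List.replicate width (none : Option Int))
  let path1 := pvSet2 path0 start.1 start.2 1
  pvLoopA m (height : Int) (width : Int) (7 * (height * width) + 2) path1 [start]

-- Python truthiness of an Optional[int]
def pvTruthy (o : Option Int) : Bool := o.getD 0 != 0

def solution (map : List (List Int)) : Int :=
  let width := ((map[0]?).getD []).length
  let height := map.length
  let pf := pvCalcPath (0, 0) map
  let pb := pvCalcPath ((height : Int) - 1, (width : Int) - 1) map
  (PySem.List.pyRange 0 (height : Int) 1).foldl (fun result i =>
    (PySem.List.pyRange 0 (width : Int) 1).foldl (fun result j =>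
      if pvTruthy (pvGet2 pf i j) && pvTruthy (pvGet2 pb i j) then
        min ((pvGet2 pf i j).getD 0 + (pvGet2 pb i j).getD 0 - 1) result
      else result) result) 4294967295

-- ===== PORT B =====

-- dist[nb][x][y] with nb ∈ {0,1}: the two layers of Source B's 3-d table, as a pair of grids
def pvGet3 (d : List (List (Option Int)) × List (List (Option Int))) (nb x y : Int) : Option Int :=
  pvGet2 (if nb = 0 then d.1 else d.2) x y

def pvSet3 (d : List (List (Option Int)) × List (List (Option Int))) (nb x y : Int) (v : Int) :
    List (List (Option Int)) × List (List (Option Int)) :=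
  if nb = 0 then (pvSet2 d.1 x y v, d.2) else (d.1, pvSet2 d.2 x y v)

-- body of Source B's inner 'for dx, dy in MOVES' loop, for one move of one frontier state
def pvMoveAug (m : List (List Int)) (h w : Int) (g : Int × Int) (level : Int)
    (c : Int × Int × Int)
    (st : (List (List (Option Int)) × List (List (Option Int))) × List (Int × Int × Int))
    (mv : Int × Int) :
    (List (List (Option Int)) × List (List (Option Int))) × List (Int × Int × Int) :=
  let nx := c.1 + mv.1
  let ny := c.2.1 + mv.2
  if 0 ≤ nx ∧ nx < h ∧ 0 ≤ ny ∧ ny < w then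
    let nb? : Option Int :=
      if pvMapGet m nx ny ≠ 1 ∨ (nx, ny) = ((0 : Int), (0 : Int)) ∨ (nx, ny) = g then some c.2.2
      else if c.2.2 = 0 then some 1 else none
    match nb? with
    | none => st
    | some nb =>
      if pvGet3 st.1 nb nx ny = none then
        (pvSet3 st.1 nb nx ny level, st.2 ++ [(nx, ny, nb)])
      else st
  else st

-- process one frontier state: try the four moves, extending the shared 'nxt' accumulator
def pvStepAug (m : List (List Int)) (h w : Int) (g : Int × Int) (level : Int)
    (st : (List (List (Option Int)) × List (List (Option Int))) × List (Int × Int × Int))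
    (c : Int × Int × Int) :
    (List (List (Option Int)) × List (List (Option Int))) × List (Int × Int × Int) :=
  pvMoves.foldl (pvMoveAug m h w g level c) st

-- Source B's 'while frontier' loop; fuel is a totality guard only (2*h*w+2 exceeds the level count)
def pvLoopAug (m : List (List Int)) (h w : Int) (g : Int × Int) :
    Nat → (List (List (Option Int)) × List (List (Option Int))) → List (Int × Int × Int) → Int →
    List (List (Option Int)) × List (List (Option Int))
  | 0, d, _, _ => d
  | _ + 1, d, [], _ => d
  | fuel + 1, d, fr, level =>
    let st := fr.foldl (pvStepAug m h w g (level + 1)) (d, [])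
    pvLoopAug m h w g fuel st.1 st.2 (level + 1)

def solution_alt (map : List (List Int)) : Int :=
  let width := ((map[0]?).getD []).length
  let height := map.length
  let g : Int × Int := ((height : Int) - 1, (width : Int) - 1)
  let d0 := (List.replicate height (List.replicate width (none : Option Int)),
             List.replicate height (List.replicate width (none : Option Int)))
  let d1 := pvSet3 d0 0 0 0 1
  let dfin := pvLoopAug map (height : Int) (width : Int) g (2 * (height * width) + 2) d1 [(0, 0, 0)] 1
  [(0 : Int), 1].foldl (fun result b =>
    if pvTruthy (pvGet3 dfin b g.1 g.2) then min result ((pvGet3 dfin b g.1 g.2).getD 0)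
    else result) 4294967295

-- ===== PRECONDITION & SPEC =====
-- Pre_ excludes inputs where Python A raises IndexError: the empty map and a zero-width first
-- row (map[0][0] / path[0][0] fail), and maps with a row shorter than the first row, where the
-- BFS indexes past that row's end whenever it reaches the missing cells.
def Pre_solution (map : List (List Int)) : Prop :=
  map ≠ [] ∧ 0 < (map.headD []).length ∧ ∀ row ∈ map, (map.headD []).length ≤ row.length
instance (map : List (List Int)) : Decidable (Pre_solution map) := by unfold Pre_solution; infer_instance

def pvWitness_solution : List (List Int) := [[0, 0], [0, 0]]

def Spec_solution (map : List (List Int)) (out : Int) : Prop := out = solution_alt map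
instance (map : List (List Int)) (out : Int) : Decidable (Spec_solution map out) := by unfold Spec_solution; infer_instance

-- ===== CLAIM (what is proved, stated in full; the proofs are below) =====
def Claim_equal_solution : Prop := ∀ (map : List (List Int)), Dom_solution map → Pre_solution map → Spec_solution map (solution map)

-- ===== LEMMAS AND PROOFS =====

-- ---------- Part 1: A's queue BFS equals a level-synchronized BFS (proof layer) ----------

-- level-BFS move (marks with d+1); proof-layer analogue of A's per-move body
def pvMoveL (m : List (List Int)) (h w d : Int) (c : Int × Int)
    (st : List (List (Option Int)) × List (Int × Int)) (mv : Int × Int) :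
    List (List (Option Int)) × List (Int × Int) :=
  let nx := c.1 + mv.1
  let ny := c.2 + mv.2
  if 0 ≤ nx ∧ nx < h ∧ 0 ≤ ny ∧ ny < w ∧ pvGet2 st.1 nx ny = none then
    let p' := pvSet2 st.1 nx ny (d + 1)
    if pvMapGet m nx ny != 1 then (p', st.2 ++ [(nx, ny)]) else (p', st.2)
  else st

def pvStepL (m : List (List Int)) (h w d : Int)
    (st : List (List (Option Int)) × List (Int × Int)) (c : Int × Int) :
    List (List (Option Int)) × List (Int × Int) :=
  pvMoves.foldl (pvMoveL m h w d c) st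

def pvLoopL (m : List (List Int)) (h w : Int) :
    Nat → List (List (Option Int)) → List (Int × Int) → Int → List (List (Option Int))
  | 0, p, _, _ => p
  | _ + 1, p, [], _ => p
  | fuel + 1, p, c :: rest, d =>
    let st := (c :: rest).foldl (pvStepL m h w d) (p, [])
    pvLoopL m h w fuel st.1 st.2 (d + 1)

def pvLvl (m : List (List Int)) (sx sy : Int) : List (List (Option Int)) :=
  let width := ((m[0]?).getD []).length
  let height := m.length
  let dist0 := List.replicate height (List.replicate width (none : Option Int))
  let dist1 := pvSet2 dist0 sx sy 1
  pvLoopL m (height : Int) (width : Int) (height * width + 2) dist1 [(sx, sy)] 1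

-- in-bounds cells, as Ints
def pvInB (h w : Int) (c : Int × Int) : Prop := 0 ≤ c.1 ∧ c.1 < h ∧ 0 ≤ c.2 ∧ c.2 < w

-- rectangular shape
def pvShape (p : List (List (Option Int))) (H W : Nat) : Prop :=
  p.length = H ∧ ∀ row ∈ p, row.length = W

-- number of unmarked cells
def pvNones (p : List (List (Option Int))) : Nat :=
  (p.map (fun r => r.countP (fun o => o.isNone))).sum

theorem pvLoopA_nil (m : List (List Int)) (h w : Int) (f : Nat) (p : List (List (Option Int))) :
    pvLoopA m h w f p [] = p := by cases f <;> rfl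

theorem pvLoopL_nil (m : List (List Int)) (h w : Int) (f : Nat) (p : List (List (Option Int))) (d : Int) :
    pvLoopL m h w f p [] d = p := by cases f <;> rfl

-- get-after-set
theorem pvGet2_set2 (p : List (List (Option Int))) (H W : Nat) (x y a b : Int) (v : Int)
    (hs : pvShape p H W) (hx : pvInB H W (x, y)) (ha : pvInB H W (a, b)) :
    pvGet2 (pvSet2 p x y v) a b = if x = a ∧ y = b then some v else pvGet2 p a b := by
  obtain ⟨hl, hr⟩ := hs
  obtain ⟨hx0, hx1, hy0, hy1⟩ := hx
  obtain ⟨ha0, ha1, hb0, hb1⟩ := ha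
  have hxl : x.toNat < p.length := by omega
  have hal : a.toNat < p.length := by omega
  have hrowx : p[x.toNat]? = some p[x.toNat] := List.getElem?_eq_getElem hxl
  have hrowa : p[a.toNat]? = some p[a.toNat] := List.getElem?_eq_getElem hal
  have hWx : p[x.toNat].length = W := hr _ (p.getElem_mem hxl)
  have hWa : p[a.toNat].length = W := hr _ (p.getElem_mem hal)
  unfold pvGet2 pvSet2
  rw [List.modify_eq_set, List.getElem?_set]
  by_cases hxa : x = a
  · subst hxa
    rw [if_pos rfl, if_pos (by omega : x.toNat < p.length)]
    simp only [Option.getD_some, hrowx]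
    rw [List.getElem?_set]
    by_cases hyb : y = b
    · have hyb' : y.toNat = b.toNat := by omega
      rw [if_pos hyb', if_pos (by omega : y.toNat < p[x.toNat].length)]
      simp [hyb]
    · have hyb' : ¬ (y.toNat = b.toNat) := by omega
      rw [if_neg hyb']
      simp [hyb]
  · have hxa' : ¬ (x.toNat = a.toNat) := by omega
    rw [if_neg hxa']
    have : ¬ (x = a ∧ y = b) := by tauto
    rw [if_neg this]

-- set preserves shape
theorem pvShape_set2 (p : List (List (Option Int))) (H W : Nat) (x y : Int) (v : Int)
    (hs : pvShape p H W) (hx : pvInB H W (x, y)) : pvShape (pvSet2 p x y v) H W := by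
  obtain ⟨hl, hr⟩ := hs
  constructor
  · simp [pvSet2, hl]
  · intro row hrow
    unfold pvSet2 at hrow
    rw [List.modify_eq_set] at hrow
    rcases List.mem_or_eq_of_mem_set hrow with h | h
    · exact hr _ h
    · obtain ⟨hx0, hx1, hy0, hy1⟩ := hx
      have hxl : x.toNat < p.length := by omega
      subst h
      rw [List.length_set]
      have : p[x.toNat]? = some p[x.toNat] := List.getElem?_eq_getElem hxl
      rw [this]
      exact hr _ (p.getElem_mem hxl)

-- marking an unmarked in-bounds cell decreases the none-count by one
theorem pvNones_set2 (p : List (List (Option Int))) (H W : Nat) (x y : Int) (v : Int)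
    (hs : pvShape p H W) (hx : pvInB H W (x, y)) (hn : pvGet2 p x y = none) :
    pvNones (pvSet2 p x y v) + 1 = pvNones p := by
  obtain ⟨hl, hr⟩ := hs
  obtain ⟨hx0, hx1, hy0, hy1⟩ := hx
  have hxl : x.toNat < p.length := by omega
  have hrowx : p[x.toNat]? = some p[x.toNat] := List.getElem?_eq_getElem hxl
  have hWx : p[x.toNat].length = W := hr _ (p.getElem_mem hxl)
  have hyl : y.toNat < p[x.toNat].length := by omega
  have hcell : p[x.toNat][y.toNat] = none := by
    unfold pvGet2 at hn
    rw [hrowx] at hn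
    simp only [Option.getD_some] at hn
    rw [List.getElem?_eq_getElem hyl] at hn
    simpa using hn
  unfold pvNones pvSet2
  rw [List.modify_eq_set, hrowx]
  simp only [Option.getD_some, List.map_set]
  rw [List.sum_set, if_pos (by simpa using hxl : x.toNat < (p.map (fun r => r.countP (fun o => o.isNone))).length)]
  have hsplit : (p.map (fun r => r.countP (fun o => o.isNone))).sum
      = ((p.map (fun r => r.countP (fun o => o.isNone))).take x.toNat).sum
        + p[x.toNat].countP (fun o => o.isNone)
        + ((p.map (fun r => r.countP (fun o => o.isNone))).drop (x.toNat + 1)).sum := by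
    conv_lhs => rw [← List.set_getElem_self (i := x.toNat) (as := p.map (fun r => r.countP (fun o => o.isNone))) (by simp [hxl])]
    rw [List.sum_set, if_pos (by simpa using hxl)]
    simp
  rw [hsplit]
  have hpos : 0 < p[x.toNat].countP (fun o => o.isNone) := by
    rw [List.countP_pos_iff]
    exact ⟨none, hcell ▸ p[x.toNat].getElem_mem hyl, by simp⟩
  rw [List.countP_set hyl, hcell]
  simp
  omega

theorem pvNones_le (p : List (List (Option Int))) (H W : Nat) (hs : pvShape p H W) :
    pvNones p ≤ H * W := by
  obtain ⟨hl, hr⟩ := hs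
  subst hl
  induction p with
  | nil => simp [pvNones]
  | cons r t ih =>
    have h1 : r.countP (fun o => o.isNone) ≤ W := by
      have := List.countP_le_length (p := fun o : Option Int => o.isNone) (l := r)
      have hw := hr r (by simp)
      omega
    have h2 := ih (fun row hm => hr row (List.mem_cons_of_mem _ hm))
    simp only [pvNones, List.map_cons, List.sum_cons, List.length_cons] at *
    rw [Nat.succ_mul]
    omega

-- a fold whose step only appends to the second component is linear in that accumulator
theorem pvFoldAccLinear {α β γ : Type} (step : (α × List β) → γ → (α × List β))
    (hstep : ∀ p acc mv, step (p, acc) mv = ((step (p, []) mv).1, acc ++ (step (p, []) mv).2)) :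
    ∀ (xs : List γ) (p : α) (acc : List β),
      xs.foldl step (p, acc) = ((xs.foldl step (p, [])).1, acc ++ (xs.foldl step (p, [])).2) := by
  intro xs
  induction xs with
  | nil => intro p acc; simp
  | cons c t ih =>
    intro p acc
    rw [List.foldl_cons, List.foldl_cons, hstep p acc c, ih]
    conv_rhs => rw [show step (p, []) c = ((step (p, []) c).1, (step (p, []) c).2) from rfl, ih]
    simp [List.append_assoc]

theorem pvMoveL_acclin (m : List (List Int)) (h w d : Int) (c : Int × Int)
    (p : List (List (Option Int))) (acc : List (Int × Int)) (mv : Int × Int) :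
    pvMoveL m h w d c (p, acc) mv
      = ((pvMoveL m h w d c (p, []) mv).1, acc ++ (pvMoveL m h w d c (p, []) mv).2) := by
  simp only [pvMoveL]
  split_ifs <;> simp

-- one L-move: shape, measure, and preservation of already-marked values
theorem pvMoveL_basic (m : List (List Int)) (H W : Nat) (d : Int) (c : Int × Int)
    (st : List (List (Option Int)) × List (Int × Int)) (mv : Int × Int)
    (hs : pvShape st.1 H W) :
    pvShape (pvMoveL m H W d c st mv).1 H W ∧
    pvNones (pvMoveL m H W d c st mv).1 + (pvMoveL m H W d c st mv).2.length ≤ pvNones st.1 + st.2.length ∧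
    (∀ a b v, pvInB H W (a, b) → pvGet2 st.1 a b = some v → pvGet2 (pvMoveL m H W d c st mv).1 a b = some v) := by
  simp only [pvMoveL]
  by_cases h1 : 0 ≤ c.1 + mv.1 ∧ c.1 + mv.1 < (H : Int) ∧ 0 ≤ c.2 + mv.2 ∧ c.2 + mv.2 < (W : Int) ∧
      pvGet2 st.1 (c.1 + mv.1) (c.2 + mv.2) = none
  · rw [if_pos h1]
    obtain ⟨hb1, hb2, hb3, hb4, hnone⟩ := h1
    have hinb : pvInB H W (c.1 + mv.1, c.2 + mv.2) := ⟨hb1, hb2, hb3, hb4⟩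
    have hshape' := pvShape_set2 st.1 H W _ _ (d + 1) hs hinb
    have hnn := pvNones_set2 st.1 H W _ _ (d + 1) hs hinb hnone
    have hpres : ∀ a b v, pvInB H W (a, b) → pvGet2 st.1 a b = some v →
        pvGet2 (pvSet2 st.1 (c.1 + mv.1) (c.2 + mv.2) (d + 1)) a b = some v := by
      intro a b v hab hv
      rw [pvGet2_set2 st.1 H W _ _ a b (d + 1) hs hinb hab]
      split_ifs with hcond
      · rw [hcond.1, hcond.2] at hnone; rw [hnone] at hv; cases hv
      · exact hv
    split_ifs with h3
    · exact ⟨hshape', by simp; omega, hpres⟩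
    · exact ⟨hshape', by simp; omega, hpres⟩
  · rw [if_neg h1]
    exact ⟨hs, le_refl _, fun a b v _ hv => hv⟩

-- one L-move: the next-frontier property
theorem pvMoveL_newacc (m : List (List Int)) (H W : Nat) (d : Int) (c : Int × Int)
    (st : List (List (Option Int)) × List (Int × Int)) (mv : Int × Int)
    (hs : pvShape st.1 H W)
    (hacc : ∀ e ∈ st.2, pvInB H W e ∧ pvGet2 st.1 e.1 e.2 = some (d + 1)) :
    ∀ e ∈ (pvMoveL m H W d c st mv).2,
      pvInB H W e ∧ pvGet2 (pvMoveL m H W d c st mv).1 e.1 e.2 = some (d + 1) := by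
  have hbasic := pvMoveL_basic m H W d c st mv hs
  simp only [pvMoveL] at hbasic ⊢
  by_cases h1 : 0 ≤ c.1 + mv.1 ∧ c.1 + mv.1 < (H : Int) ∧ 0 ≤ c.2 + mv.2 ∧ c.2 + mv.2 < (W : Int) ∧
      pvGet2 st.1 (c.1 + mv.1) (c.2 + mv.2) = none
  · rw [if_pos h1] at hbasic ⊢
    obtain ⟨hb1, hb2, hb3, hb4, hnone⟩ := h1
    have hinb : pvInB H W (c.1 + mv.1, c.2 + mv.2) := ⟨hb1, hb2, hb3, hb4⟩
    have hnew : pvGet2 (pvSet2 st.1 (c.1 + mv.1) (c.2 + mv.2) (d + 1)) (c.1 + mv.1) (c.2 + mv.2)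
        = some (d + 1) := by
      rw [pvGet2_set2 st.1 H W _ _ _ _ (d + 1) hs hinb hinb]
      simp
    split_ifs with h3 <;> split_ifs at hbasic <;> intro e he
    · rcases List.mem_append.mp he with he | he
      · exact ⟨(hacc e he).1, hbasic.2.2 e.1 e.2 (d + 1) (hacc e he).1 (hacc e he).2⟩
      · simp only [List.mem_singleton] at he
        subst he
        exact ⟨hinb, hnew⟩
    · exact ⟨(hacc e he).1, hbasic.2.2 e.1 e.2 (d + 1) (hacc e he).1 (hacc e he).2⟩
  · rw [if_neg h1] at hbasic ⊢
    exact hacc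

-- one move: A computes what the level BFS computes once the popped cell carries the level value d
theorem pvMoveA_eq_L (m : List (List Int)) (H W : Nat) (d : Int) (c : Int × Int)
    (st : List (List (Option Int)) × List (Int × Int)) (mv : Int × Int)
    (hc : pvGet2 st.1 c.1 c.2 = some d) :
    pvMoveA m H W c st mv = pvMoveL m H W d c st mv := by
  simp only [pvMoveA, pvMoveL, hc, Option.getD_some]
  by_cases h1 : 0 ≤ c.1 + mv.1 ∧ c.1 + mv.1 < (H : Int) ∧ 0 ≤ c.2 + mv.2 ∧ c.2 + mv.2 < (W : Int)
  · by_cases h2 : pvGet2 st.1 (c.1 + mv.1) (c.2 + mv.2) = none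
    · have hb : 0 ≤ c.1 + mv.1 ∧ c.1 + mv.1 < (H : Int) ∧ 0 ≤ c.2 + mv.2 ∧ c.2 + mv.2 < (W : Int) ∧
          pvGet2 st.1 (c.1 + mv.1) (c.2 + mv.2) = none := ⟨h1.1, h1.2.1, h1.2.2.1, h1.2.2.2, h2⟩
      rw [if_pos h1, if_pos h2, if_pos hb]
      by_cases h3 : pvMapGet m (c.1 + mv.1) (c.2 + mv.2) = 1
      · rw [if_pos h3,
          if_neg (show ¬((pvMapGet m (c.1 + mv.1) (c.2 + mv.2) != 1) = true) by simp [h3])]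
      · rw [if_neg h3,
          if_pos (show (pvMapGet m (c.1 + mv.1) (c.2 + mv.2) != 1) = true by simp [h3])]
    · have hnb : ¬(0 ≤ c.1 + mv.1 ∧ c.1 + mv.1 < (H : Int) ∧ 0 ≤ c.2 + mv.2 ∧ c.2 + mv.2 < (W : Int) ∧
          pvGet2 st.1 (c.1 + mv.1) (c.2 + mv.2) = none) := by tauto
      rw [if_pos h1, if_neg h2, if_neg hnb]
  · have hnb : ¬(0 ≤ c.1 + mv.1 ∧ c.1 + mv.1 < (H : Int) ∧ 0 ≤ c.2 + mv.2 ∧ c.2 + mv.2 < (W : Int) ∧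
        pvGet2 st.1 (c.1 + mv.1) (c.2 + mv.2) = none) := by tauto
    rw [if_neg h1, if_neg hnb]

-- fold over a move list: shape, measure, preservation
theorem pvFoldMoves_basic (m : List (List Int)) (H W : Nat) (d : Int) (c : Int × Int) :
    ∀ (mvs : List (Int × Int)) (st : List (List (Option Int)) × List (Int × Int)),
      pvShape st.1 H W →
      pvShape (mvs.foldl (pvMoveL m H W d c) st).1 H W ∧
      pvNones (mvs.foldl (pvMoveL m H W d c) st).1 + (mvs.foldl (pvMoveL m H W d c) st).2.length
        ≤ pvNones st.1 + st.2.length ∧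
      (∀ a b v, pvInB H W (a, b) → pvGet2 st.1 a b = some v →
        pvGet2 (mvs.foldl (pvMoveL m H W d c) st).1 a b = some v) := by
  intro mvs
  induction mvs with
  | nil => intro st hs; exact ⟨hs, le_refl _, fun a b v _ hv => hv⟩
  | cons mv t ih =>
    intro st hs
    rw [List.foldl_cons]
    have h1 := pvMoveL_basic m H W d c st mv hs
    have h2 := ih (pvMoveL m H W d c st mv) h1.1
    exact ⟨h2.1, le_trans h2.2.1 h1.2.1,
      fun a b v hab hv => h2.2.2 a b v hab (h1.2.2 a b v hab hv)⟩

theorem pvFoldMoves_newacc (m : List (List Int)) (H W : Nat) (d : Int) (c : Int × Int) :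
    ∀ (mvs : List (Int × Int)) (st : List (List (Option Int)) × List (Int × Int)),
      pvShape st.1 H W →
      (∀ e ∈ st.2, pvInB H W e ∧ pvGet2 st.1 e.1 e.2 = some (d + 1)) →
      ∀ e ∈ (mvs.foldl (pvMoveL m H W d c) st).2,
        pvInB H W e ∧ pvGet2 (mvs.foldl (pvMoveL m H W d c) st).1 e.1 e.2 = some (d + 1) := by
  intro mvs
  induction mvs with
  | nil => intro st _ hacc; exact hacc
  | cons mv t ih =>
    intro st hs hacc
    rw [List.foldl_cons]
    exact ih (pvMoveL m H W d c st mv) (pvMoveL_basic m H W d c st mv hs).1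
      (pvMoveL_newacc m H W d c st mv hs hacc)

theorem pvFoldMoves_eq (m : List (List Int)) (H W : Nat) (d : Int) (c : Int × Int) :
    ∀ (mvs : List (Int × Int)) (st : List (List (Option Int)) × List (Int × Int)),
      pvShape st.1 H W → pvInB H W c → pvGet2 st.1 c.1 c.2 = some d →
      mvs.foldl (pvMoveA m H W c) st = mvs.foldl (pvMoveL m H W d c) st := by
  intro mvs
  induction mvs with
  | nil => intro st _ _ _; rfl
  | cons mv t ih =>
    intro st hs hcb hcv
    rw [List.foldl_cons, List.foldl_cons, pvMoveA_eq_L m H W d c st mv hcv]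
    have h1 := pvMoveL_basic m H W d c st mv hs
    exact ih (pvMoveL m H W d c st mv) h1.1 hcb (h1.2.2 c.1 c.2 d hcb hcv)

-- one frontier cell: the same facts for pvStepL
theorem pvStepL_basic (m : List (List Int)) (H W : Nat) (d : Int) (c : Int × Int)
    (st : List (List (Option Int)) × List (Int × Int)) (hs : pvShape st.1 H W) :
    pvShape (pvStepL m H W d st c).1 H W ∧
    pvNones (pvStepL m H W d st c).1 + (pvStepL m H W d st c).2.length ≤ pvNones st.1 + st.2.length ∧
    (∀ a b v, pvInB H W (a, b) → pvGet2 st.1 a b = some v →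
      pvGet2 (pvStepL m H W d st c).1 a b = some v) :=
  pvFoldMoves_basic m H W d c pvMoves st hs

theorem pvStepL_newacc (m : List (List Int)) (H W : Nat) (d : Int) (c : Int × Int)
    (st : List (List (Option Int)) × List (Int × Int)) (hs : pvShape st.1 H W)
    (hacc : ∀ e ∈ st.2, pvInB H W e ∧ pvGet2 st.1 e.1 e.2 = some (d + 1)) :
    ∀ e ∈ (pvStepL m H W d st c).2,
      pvInB H W e ∧ pvGet2 (pvStepL m H W d st c).1 e.1 e.2 = some (d + 1) :=
  pvFoldMoves_newacc m H W d c pvMoves st hs hacc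

-- one frontier cell: A's expand-and-append equals the level step
theorem pvStepA_eq_L (m : List (List Int)) (H W : Nat) (d : Int) (c : Int × Int)
    (st : List (List (Option Int)) × List (Int × Int))
    (hs : pvShape st.1 H W) (hcb : pvInB H W c) (hcv : pvGet2 st.1 c.1 c.2 = some d) :
    ((pvExpandA m H W st.1 c).1, st.2 ++ (pvExpandA m H W st.1 c).2) = pvStepL m H W d st c := by
  have hlinL := pvFoldAccLinear (pvMoveL m H W d c) (pvMoveL_acclin m H W d c) pvMoves st.1 st.2
  have heq := pvFoldMoves_eq m H W d c pvMoves (st.1, []) hs hcb hcv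
  unfold pvExpandA pvStepL
  rw [show st = (st.1, st.2) from rfl] at hlinL ⊢
  rw [hlinL, heq]

-- the level fold: shape, measure, preservation, next-frontier property
theorem pvLevel_inv (m : List (List Int)) (H W : Nat) (d : Int) :
    ∀ (xs : List (Int × Int)) (p : List (List (Option Int))) (acc : List (Int × Int)),
      pvShape p H W →
      (∀ e ∈ acc, pvInB H W e ∧ pvGet2 p e.1 e.2 = some (d + 1)) →
      pvShape (xs.foldl (pvStepL m H W d) (p, acc)).1 H W ∧
      (∀ e ∈ (xs.foldl (pvStepL m H W d) (p, acc)).2, pvInB H W e ∧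
        pvGet2 (xs.foldl (pvStepL m H W d) (p, acc)).1 e.1 e.2 = some (d + 1)) ∧
      pvNones (xs.foldl (pvStepL m H W d) (p, acc)).1 + (xs.foldl (pvStepL m H W d) (p, acc)).2.length
        ≤ pvNones p + acc.length ∧
      (∀ a b v, pvInB H W (a, b) → pvGet2 p a b = some v →
        pvGet2 (xs.foldl (pvStepL m H W d) (p, acc)).1 a b = some v) := by
  intro xs
  induction xs with
  | nil => intro p acc hs hacc; exact ⟨hs, hacc, le_refl _, fun a b v _ hv => hv⟩
  | cons c t ih =>
    intro p acc hs hacc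
    rw [List.foldl_cons]
    have h1 := pvStepL_basic m H W d c (p, acc) hs
    have h2 := pvStepL_newacc m H W d c (p, acc) hs hacc
    have h3 := ih (pvStepL m H W d (p, acc) c).1 (pvStepL m H W d (p, acc) c).2 h1.1 h2
    refine ⟨h3.1, h3.2.1, le_trans h3.2.2.1 h1.2.1,
      fun a b v hab hv => h3.2.2.2 a b v hab (h1.2.2 a b v hab hv)⟩

-- A's per-cell step in queue form: expand, then append the newly found cells to the tail
def pvStepA (m : List (List Int)) (h w : Int)
    (st : List (List (Option Int)) × List (Int × Int)) (c : Int × Int) :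
    List (List (Option Int)) × List (Int × Int) :=
  ((pvExpandA m h w st.1 c).1, st.2 ++ (pvExpandA m h w st.1 c).2)

theorem pvStepA_acclin (m : List (List Int)) (h w : Int)
    (p : List (List (Option Int))) (acc : List (Int × Int)) (c : Int × Int) :
    pvStepA m h w (p, acc) c = ((pvStepA m h w (p, []) c).1, acc ++ (pvStepA m h w (p, []) c).2) := by
  simp [pvStepA]

-- crunching one whole level on the A side
theorem pvLoopA_level (m : List (List Int)) (h w : Int) :
    ∀ (xs ys : List (Int × Int)) (p : List (List (Option Int))) (f : Nat),
      pvLoopA m h w (f + xs.length) p (xs ++ ys)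
        = pvLoopA m h w f (xs.foldl (pvStepA m h w) (p, [])).1
            (ys ++ (xs.foldl (pvStepA m h w) (p, [])).2) := by
  intro xs
  induction xs with
  | nil => intro ys p f; simp
  | cons c t ih =>
    intro ys p f
    have hlin := pvFoldAccLinear (pvStepA m h w) (fun p acc c => pvStepA_acclin m h w p acc c) t
    have h1 : pvLoopA m h w (f + (c :: t).length) p ((c :: t) ++ ys)
        = pvLoopA m h w (f + t.length) (pvExpandA m h w p c).1
            (t ++ (ys ++ (pvExpandA m h w p c).2)) := by
      show pvLoopA m h w ((f + t.length) + 1) p (c :: (t ++ ys)) = _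
      rw [show pvLoopA m h w ((f + t.length) + 1) p (c :: (t ++ ys))
          = pvLoopA m h w (f + t.length) (pvExpandA m h w p c).1 ((t ++ ys) ++ (pvExpandA m h w p c).2)
          from rfl]
      rw [List.append_assoc]
    rw [h1, ih (ys ++ (pvExpandA m h w p c).2) (pvExpandA m h w p c).1 f]
    rw [List.foldl_cons]
    rw [show pvStepA m h w (p, []) c = ((pvExpandA m h w p c).1, [] ++ (pvExpandA m h w p c).2) from rfl]
    simp only [List.nil_append]
    rw [hlin (pvExpandA m h w p c).1 (pvExpandA m h w p c).2]
    simp [List.append_assoc]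

-- the A-side level fold equals the level-BFS fold, given the level invariant
theorem pvLevel_eq (m : List (List Int)) (H W : Nat) (d : Int) :
    ∀ (xs : List (Int × Int)) (p : List (List (Option Int))) (acc : List (Int × Int)),
      pvShape p H W →
      (∀ c ∈ xs, pvInB H W c ∧ pvGet2 p c.1 c.2 = some d) →
      xs.foldl (pvStepA m H W) (p, acc) = xs.foldl (pvStepL m H W d) (p, acc) := by
  intro xs
  induction xs with
  | nil => intro p acc _ _; rfl
  | cons c t ih =>
    intro p acc hs hfr
    rw [List.foldl_cons, List.foldl_cons]
    have hc := hfr c (by simp)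
    have hstep : pvStepA m H W (p, acc) c = pvStepL m H W d (p, acc) c :=
      pvStepA_eq_L m H W d c (p, acc) hs hc.1 hc.2
    rw [hstep]
    have hb := pvStepL_basic m H W d c (p, acc) hs
    have hfr' : ∀ c' ∈ t, pvInB H W c' ∧
        pvGet2 (pvStepL m H W d (p, acc) c).1 c'.1 c'.2 = some d := by
      intro c' hc'
      have h := hfr c' (List.mem_cons_of_mem _ hc')
      exact ⟨h.1, hb.2.2 c'.1 c'.2 d h.1 h.2⟩
    rw [show pvStepL m H W d (p, acc) c
        = ((pvStepL m H W d (p, acc) c).1, (pvStepL m H W d (p, acc) c).2) from rfl]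
    exact ih _ _ hb.1 hfr'

-- main alignment: queue BFS = level BFS, with enough fuel on both sides
theorem pvAlign (m : List (List Int)) (H W : Nat) :
    ∀ (n : Nat) (p : List (List (Option Int))) (fr : List (Int × Int)) (d : Int) (fa fb : Nat),
      pvNones p ≤ n →
      pvShape p H W →
      (∀ c ∈ fr, pvInB H W c ∧ pvGet2 p c.1 c.2 = some d) →
      7 * pvNones p + fr.length ≤ fa →
      pvNones p + 1 ≤ fb →
      pvLoopA m H W fa p fr = pvLoopL m H W fb p fr d := by
  intro n
  induction n using Nat.strong_induction_on with
  | _ n IH =>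
    intro p fr d fa fb hn hs hfr hfa hfb
    cases fr with
    | nil => rw [pvLoopA_nil, pvLoopL_nil]
    | cons c rest =>
      obtain ⟨g, rfl⟩ : ∃ g, fb = g + 1 := ⟨fb - 1, by omega⟩
      have hBstep : pvLoopL m H W (g + 1) p (c :: rest) d
          = pvLoopL m H W g ((c :: rest).foldl (pvStepL m H W d) (p, [])).1
              ((c :: rest).foldl (pvStepL m H W d) (p, [])).2 (d + 1) := rfl
      obtain ⟨f', rfl⟩ : ∃ f', fa = f' + (c :: rest).length := ⟨fa - (c :: rest).length, by omega⟩
      have hQeq : (c :: rest).foldl (pvStepA m (H : Int) (W : Int)) (p, [])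
          = (c :: rest).foldl (pvStepL m (H : Int) (W : Int) d) (p, []) :=
        pvLevel_eq m H W d (c :: rest) p [] hs hfr
      set Q := (c :: rest).foldl (pvStepL m (H : Int) (W : Int) d) (p, []) with hQdef
      have hA : pvLoopA m (H : Int) (W : Int) (f' + (c :: rest).length) p (c :: rest)
          = pvLoopA m (H : Int) (W : Int) f' Q.1 Q.2 := by
        have h := pvLoopA_level m (H : Int) (W : Int) (c :: rest) [] p f'
        simp only [List.append_nil, List.nil_append] at h
        rw [h, hQeq]
      rw [hA, hBstep]
      have hinv := pvLevel_inv m H W d (c :: rest) p [] hs (by simp)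
      rw [← hQdef] at hinv
      cases hnxt : Q.2 with
      | nil => rw [pvLoopA_nil, pvLoopL_nil]
      | cons q qs =>
        have hmeas : pvNones Q.1 + Q.2.length ≤ pvNones p := by
          have := hinv.2.2.1
          simpa using this
        have hlt : pvNones Q.1 < pvNones p := by
          rw [hnxt] at hmeas
          simp only [List.length_cons] at hmeas
          omega
        have hfa' : 7 * pvNones Q.1 + Q.2.length ≤ f' := by omega
        have hfb' : pvNones Q.1 + 1 ≤ g := by omega
        rw [← hnxt]
        exact IH (pvNones Q.1) (by omega) Q.1 Q.2 (d + 1) f' g (le_refl _) hinv.1 hinv.2.1 hfa' hfb'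

theorem pvCalcPath_eq_lvl (m : List (List Int)) (s : Int × Int)
    (hin : pvInB (m.length) (((m[0]?).getD []).length) s) :
    pvCalcPath s m = pvLvl m s.1 s.2 := by
  simp only [pvCalcPath, pvLvl]
  have hshape0 : pvShape (List.replicate m.length (List.replicate ((m[0]?).getD []).length (none : Option Int)))
      m.length ((m[0]?).getD []).length := by
    refine ⟨by simp, ?_⟩
    intro row hrow
    rw [List.eq_of_mem_replicate hrow]
    simp
  have hshape1 := pvShape_set2 _ m.length ((m[0]?).getD []).length s.1 s.2 1 hshape0 hin
  have hget1 : pvGet2 (pvSet2 (List.replicate m.length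
        (List.replicate ((m[0]?).getD []).length (none : Option Int))) s.1 s.2 1) s.1 s.2 = some 1 := by
    rw [pvGet2_set2 _ m.length ((m[0]?).getD []).length s.1 s.2 s.1 s.2 1 hshape0 hin hin]
    simp
  have hle := pvNones_le _ m.length ((m[0]?).getD []).length hshape1
  apply pvAlign m m.length ((m[0]?).getD []).length (pvNones _) _ _ 1 _ _ (le_refl _) hshape1
  · intro c hc
    simp only [List.mem_singleton] at hc
    subst hc
    exact ⟨hin, hget1⟩
  · simp only [List.length_singleton]
    omega
  · omega

-- ---------- Part 2: generic BFS semantics (exact-n-step reachability and distances) ----------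

def pvReachN {σ : Type} (E : σ → σ → Prop) (s : σ) : Nat → σ → Prop
  | 0, c => c = s
  | n + 1, c => ∃ p, pvReachN E s n p ∧ E p c

def pvReach {σ : Type} (E : σ → σ → Prop) (s c : σ) : Prop := ∃ n, pvReachN E s n c

noncomputable def pvDist {σ : Type} (E : σ → σ → Prop) (s c : σ) : Nat :=
  sInf {n | pvReachN E s n c}

theorem pvReachN_zero {σ : Type} (E : σ → σ → Prop) (s : σ) : pvReachN E s 0 s := rfl

theorem pvReachN_dist {σ : Type} (E : σ → σ → Prop) (s c : σ) (h : pvReach E s c) :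
    pvReachN E s (pvDist E s c) c :=
  Nat.sInf_mem h

theorem pvDist_le {σ : Type} (E : σ → σ → Prop) (s c : σ) (n : Nat) (h : pvReachN E s n c) :
    pvDist E s c ≤ n :=
  Nat.sInf_le h

theorem pvDist_s {σ : Type} (E : σ → σ → Prop) (s : σ) : pvDist E s s = 0 :=
  Nat.le_zero.mp (pvDist_le E s s 0 (pvReachN_zero E s))

theorem pvReachN_compose {σ : Type} (E : σ → σ → Prop) (s y x : σ) (a : Nat) :
    ∀ b, pvReachN E s a y → pvReachN E y b x → pvReachN E s (a + b) x := by
  intro b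
  induction b generalizing x with
  | zero => intro h1 h2; rw [show x = y from h2]; exact h1
  | succ b ih =>
    rintro h1 ⟨p, hp, he⟩
    exact ⟨p, ih p h1 hp, he⟩

theorem pvReachN_decompose {σ : Type} (E : σ → σ → Prop) (s : σ) :
    ∀ (n : Nat) (x : σ), pvReachN E s n x → ∀ t ≤ n, ∃ y, pvReachN E s t y ∧ pvReachN E y (n - t) x := by
  intro n
  induction n with
  | zero =>
    intro x h t ht
    have ht0 : t = 0 := Nat.le_zero.mp ht
    subst ht0
    exact ⟨x, h, rfl⟩
  | succ n ih =>
    rintro x ⟨p, hp, he⟩ t ht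
    rcases Nat.lt_or_ge t (n + 1) with hlt | hge
    · obtain ⟨y, hy1, hy2⟩ := ih p hp t (by omega)
      refine ⟨y, hy1, ?_⟩
      have : n + 1 - t = (n - t) + 1 := by omega
      rw [this]
      exact ⟨p, hy2, he⟩
    · have : t = n + 1 := by omega
      subst this
      exact ⟨x, ⟨p, hp, he⟩, by simp [pvReachN]⟩

theorem pvReachN_head {σ : Type} (E : σ → σ → Prop) (s s0 : σ) (h0 : E s0 s) :
    ∀ (n : Nat) (c : σ), pvReachN E s n c → pvReachN E s0 (n + 1) c := by
  intro n
  induction n with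
  | zero => intro c h; rw [show c = s from h]; exact ⟨s0, rfl, h0⟩
  | succ n ih =>
    rintro c ⟨p, hp, he⟩
    exact ⟨p, ih p hp, he⟩

theorem pvReachN_rev {σ : Type} (E : σ → σ → Prop) (s : σ) :
    ∀ (n : Nat) (c : σ), pvReachN E s n c → pvReachN (fun a b => E b a) c n s := by
  intro n
  induction n with
  | zero => intro c h; rw [show c = s from h]; exact rfl
  | succ n ih =>
    rintro c ⟨p, hp, he⟩
    exact pvReachN_head (fun a b => E b a) p c he n s (ih p hp)

theorem pvReachN_mono {σ : Type} (E E' : σ → σ → Prop) (hEE : ∀ u v, E u v → E' u v) (s : σ) :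
    ∀ (n : Nat) (c : σ), pvReachN E s n c → pvReachN E' s n c := by
  intro n
  induction n with
  | zero => intro c h; exact h
  | succ n ih => rintro c ⟨p, hp, he⟩; exact ⟨p, ih p hp, hEE p c he⟩

-- along a minimal-length witness every prefix cell realizes its distance
theorem pvDist_prefix {σ : Type} (E : σ → σ → Prop) (s x : σ) (n : Nat)
    (hx : pvReachN E s n x) (hmin : pvDist E s x = n) :
    ∀ t ≤ n, ∃ y, pvReachN E s t y ∧ pvDist E s y = t := by
  intro t ht
  obtain ⟨y, hy1, hy2⟩ := pvReachN_decompose E s n x hx t ht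
  refine ⟨y, hy1, ?_⟩
  have h1 : pvDist E s y ≤ t := pvDist_le E s y t hy1
  rcases Nat.lt_or_ge (pvDist E s y) t with hlt | hge
  · exfalso
    have hreach : pvReach E s y := ⟨t, hy1⟩
    have h3 := pvReachN_compose E s y x (pvDist E s y) (n - t) (pvReachN_dist E s y hreach) hy2
    have h4 := pvDist_le E s x _ h3
    omega
  · omega

-- a predecessor on a minimal path sits exactly one level below
theorem pvDist_pred {σ : Type} (E : σ → σ → Prop) (s c : σ) (k : Nat)
    (hreach : pvReach E s c) (hd : pvDist E s c = k + 1) :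
    ∃ p, pvReachN E s k p ∧ pvDist E s p = k ∧ E p c := by
  have h1 : pvReachN E s (k + 1) c := by rw [← hd]; exact pvReachN_dist E s c hreach
  obtain ⟨p, hp, he⟩ := h1
  refine ⟨p, hp, ?_, he⟩
  have h2 : pvDist E s p ≤ k := pvDist_le E s p k hp
  rcases Nat.lt_or_ge (pvDist E s p) k with hlt | hge
  · exfalso
    have h3 : pvReachN E s (pvDist E s p) p := pvReachN_dist E s p ⟨k, hp⟩
    have h4 : pvReachN E s (pvDist E s p + 1) c := ⟨p, h3, he⟩
    have h5 := pvDist_le E s c _ h4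
    omega
  · omega

-- ---------- Part 3: the three graphs on the grid ----------

def pvHh (m : List (List Int)) : Nat := m.length
def pvWw (m : List (List Int)) : Nat := ((m[0]?).getD []).length

def pvInb (m : List (List Int)) (c : Int × Int) : Prop :=
  pvInB (pvHh m) (pvWw m) c

def pvAdj (c d : Int × Int) : Prop := ∃ mv ∈ pvMoves, d = (c.1 + mv.1, c.2 + mv.2)

def pvGoal (m : List (List Int)) : Int × Int := ((pvHh m : Int) - 1, (pvWw m : Int) - 1)

-- expandability for calc_path started at s: the start, and open cells
def pvOpenS (m : List (List Int)) (s u : Int × Int) : Prop :=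
  u = s ∨ pvMapGet m u.1 u.2 ≠ 1

-- the one-sided BFS graph of calc_path(s, map)
def pvES (m : List (List Int)) (s : Int × Int) (u v : Int × Int) : Prop :=
  pvInb m u ∧ pvInb m v ∧ pvAdj u v ∧ pvOpenS m s u

-- cells the augmented search may enter without spending the break
def pvFree (m : List (List Int)) (u : Int × Int) : Prop :=
  pvInb m u ∧ (pvMapGet m u.1 u.2 ≠ 1 ∨ u = (0, 0) ∨ u = pvGoal m)

-- the augmented graph of Source B: states (cell, broke)
def pvEAug (m : List (List Int)) (x y : (Int × Int) × Bool) : Prop :=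
  pvInb m x.1 ∧ pvInb m y.1 ∧ pvAdj x.1 y.1 ∧
    ((pvFree m y.1 ∧ y.2 = x.2) ∨ (¬ pvFree m y.1 ∧ x.2 = false ∧ y.2 = true))

-- free-entry steps (used to shuffle path segments between the graphs)
def pvR (m : List (List Int)) (u v : Int × Int) : Prop :=
  pvInb m u ∧ pvInb m v ∧ pvAdj u v ∧ pvFree m v

theorem pvAdj_symm (c d : Int × Int) (h : pvAdj c d) : pvAdj d c := by
  obtain ⟨mv, hmv, rfl⟩ := h
  refine ⟨(-mv.1, -mv.2), ?_, by simp⟩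
  simp only [pvMoves, List.mem_cons, List.not_mem_nil] at hmv ⊢
  rcases hmv with h | h | h | h | h <;> simp [h]


-- encode a broke flag as the Int Source B carries
def pvBi (j : Bool) : Int := if j then 1 else 0

-- reached states sit on in-bounds cells
theorem pvInvInb (m : List (List Int)) (h00 : pvInb m (0, 0)) :
    ∀ (n : Nat) (x : (Int × Int) × Bool), pvReachN (pvEAug m) ((0, 0), false) n x →
      pvInb m x.1 := by
  intro n
  induction n with
  | zero =>
    intro x h
    rw [show x = ((0, 0), false) from h]
    exact h00
  | succ n ih =>
    rintro x ⟨p, hp, he⟩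
    exact he.2.1


-- ---------- Part 4a: effect of one level of the A-side BFS on the grid ----------

-- effect of one move on the grid, as an iff
theorem pvMoveL_marked (m : List (List Int)) (H W : Nat) (d : Int) (f : Int × Int)
    (st : List (List (Option Int)) × List (Int × Int)) (mv : Int × Int)
    (hs : pvShape st.1 H W) (c : Int × Int) (hc : pvInB H W c) (v : Int) :
    pvGet2 (pvMoveL m H W d f st mv).1 c.1 c.2 = some v ↔
      (pvGet2 st.1 c.1 c.2 = some v ∨
        (pvGet2 st.1 c.1 c.2 = none ∧ c = (f.1 + mv.1, f.2 + mv.2) ∧ pvInB H W c ∧ v = d + 1)) := by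
  simp only [pvMoveL]
  by_cases hg : 0 ≤ f.1 + mv.1 ∧ f.1 + mv.1 < (H : Int) ∧ 0 ≤ f.2 + mv.2 ∧ f.2 + mv.2 < (W : Int) ∧
      pvGet2 st.1 (f.1 + mv.1) (f.2 + mv.2) = none
  · rw [if_pos hg]
    have hit : pvInB H W (f.1 + mv.1, f.2 + mv.2) := ⟨hg.1, hg.2.1, hg.2.2.1, hg.2.2.2.1⟩
    have hset := pvGet2_set2 st.1 H W (f.1 + mv.1) (f.2 + mv.2) c.1 c.2 (d + 1) hs hit hc
    have hget : pvGet2 (pvSet2 st.1 (f.1 + mv.1) (f.2 + mv.2) (d + 1)) c.1 c.2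
        = if f.1 + mv.1 = c.1 ∧ f.2 + mv.2 = c.2 then some (d + 1) else pvGet2 st.1 c.1 c.2 := hset
    have hmain : pvGet2 (pvSet2 st.1 (f.1 + mv.1) (f.2 + mv.2) (d + 1)) c.1 c.2 = some v ↔
        (pvGet2 st.1 c.1 c.2 = some v ∨
          (pvGet2 st.1 c.1 c.2 = none ∧ c = (f.1 + mv.1, f.2 + mv.2) ∧ pvInB H W c ∧ v = d + 1)) := by
      rw [hget]
      by_cases heq : f.1 + mv.1 = c.1 ∧ f.2 + mv.2 = c.2
      · have hceq : c = (f.1 + mv.1, f.2 + mv.2) := by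
          obtain ⟨h1, h2⟩ := heq
          exact Prod.ext h1.symm h2.symm
        have hnone : pvGet2 st.1 c.1 c.2 = none := by rw [hceq]; exact hg.2.2.2.2
        rw [if_pos heq]
        constructor
        · intro h
          exact Or.inr ⟨hnone, hceq, hc, by injection h with h'; omega⟩
        · rintro (h | ⟨_, _, _, rfl⟩)
          · rw [hnone] at h; cases h
          · rfl
      · rw [if_neg heq]
        constructor
        · exact Or.inl
        · rintro (h | ⟨_, hceq, _, _⟩)
          · exact h
          · exact absurd ⟨(congrArg Prod.fst hceq).symm, (congrArg Prod.snd hceq).symm⟩ heq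
    split_ifs <;> exact hmain
  · rw [if_neg hg]
    constructor
    · exact Or.inl
    · rintro (h | ⟨hnone, hceq, hcin, _⟩)
      · exact h
      · exfalso
        apply hg
        obtain ⟨h1, h2, h3, h4⟩ := hcin
        rw [hceq] at hnone
        rw [hceq] at h1 h2 h3 h4
        exact ⟨h1, h2, h3, h4, hnone⟩

-- effect of one move on the pending frontier, as an iff
theorem pvMoveL_front (m : List (List Int)) (H W : Nat) (d : Int) (f : Int × Int)
    (st : List (List (Option Int)) × List (Int × Int)) (mv : Int × Int) (x : Int × Int) :
    x ∈ (pvMoveL m H W d f st mv).2 ↔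
      (x ∈ st.2 ∨
        (pvGet2 st.1 x.1 x.2 = none ∧ x = (f.1 + mv.1, f.2 + mv.2) ∧ pvInB H W x ∧
          pvMapGet m x.1 x.2 ≠ 1)) := by
  simp only [pvMoveL]
  by_cases hg : 0 ≤ f.1 + mv.1 ∧ f.1 + mv.1 < (H : Int) ∧ 0 ≤ f.2 + mv.2 ∧ f.2 + mv.2 < (W : Int) ∧
      pvGet2 st.1 (f.1 + mv.1) (f.2 + mv.2) = none
  · rw [if_pos hg]
    by_cases hw : pvMapGet m (f.1 + mv.1) (f.2 + mv.2) = 1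
    · rw [if_neg (by simp [hw])]
      constructor
      · exact Or.inl
      · rintro (h | ⟨_, rfl, _, hne⟩)
        · exact h
        · exact absurd hw hne
    · rw [if_pos (by simp [hw])]
      simp only [List.mem_append, List.mem_singleton]
      constructor
      · rintro (h | rfl)
        · exact Or.inl h
        · exact Or.inr ⟨hg.2.2.2.2, rfl, ⟨hg.1, hg.2.1, hg.2.2.1, hg.2.2.2.1⟩, hw⟩
      · rintro (h | ⟨_, rfl, _, _⟩)
        · exact Or.inl h
        · exact Or.inr rfl
  · rw [if_neg hg]
    constructor
    · exact Or.inl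
    · rintro (h | ⟨hnone, rfl, hcin, _⟩)
      · exact h
      · exact absurd ⟨hcin.1, hcin.2.1, hcin.2.2.1, hcin.2.2.2, hnone⟩ hg

-- a marked cell becomes none after a move iff it was none and is not the move's target
theorem pvMoveL_none (m : List (List Int)) (H W : Nat) (d : Int) (f : Int × Int)
    (st : List (List (Option Int)) × List (Int × Int)) (mv : Int × Int)
    (hs : pvShape st.1 H W) (c : Int × Int) (hc : pvInB H W c) :
    pvGet2 (pvMoveL m H W d f st mv).1 c.1 c.2 = none ↔
      (pvGet2 st.1 c.1 c.2 = none ∧ ¬ (c = (f.1 + mv.1, f.2 + mv.2) ∧ pvInB H W c)) := by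
  cases hcur : pvGet2 st.1 c.1 c.2 with
  | some w =>
    have := (pvMoveL_marked m H W d f st mv hs c hc w).mpr (Or.inl hcur)
    rw [this]
    simp
  | none =>
    cases hres : pvGet2 (pvMoveL m H W d f st mv).1 c.1 c.2 with
    | some w =>
      rcases (pvMoveL_marked m H W d f st mv hs c hc w).mp hres with h | ⟨_, hceq, hcin, _⟩
      · rw [h] at hcur; cases hcur
      · simp only [true_and]
        constructor
        · intro h; cases h
        · intro h; exact absurd ⟨hceq, hcin⟩ h
    | none =>
      simp only [true_and, true_iff]
      rintro ⟨hceq, hcin⟩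
      have := (pvMoveL_marked m H W d f st mv hs c hc (d + 1)).mpr
        (Or.inr ⟨hcur, hceq, hcin, rfl⟩)
      rw [this] at hres
      cases hres

-- effect of the four-move fold of one frontier cell, as an iff
theorem pvStepL_marked (m : List (List Int)) (H W : Nat) (d : Int) (f : Int × Int) :
    ∀ (mvs : List (Int × Int)) (st : List (List (Option Int)) × List (Int × Int)),
      pvShape st.1 H W → ∀ (c : Int × Int), pvInB H W c → ∀ (v : Int),
      (pvGet2 (mvs.foldl (pvMoveL m H W d f) st).1 c.1 c.2 = some v ↔
        (pvGet2 st.1 c.1 c.2 = some v ∨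
          (pvGet2 st.1 c.1 c.2 = none ∧ (∃ mv ∈ mvs, c = (f.1 + mv.1, f.2 + mv.2)) ∧
            pvInB H W c ∧ v = d + 1))) ∧
      (pvGet2 (mvs.foldl (pvMoveL m H W d f) st).1 c.1 c.2 = none ↔
        (pvGet2 st.1 c.1 c.2 = none ∧ ¬ ((∃ mv ∈ mvs, c = (f.1 + mv.1, f.2 + mv.2)) ∧ pvInB H W c))) := by
  intro mvs
  induction mvs with
  | nil =>
    intro st hs c hc v
    simp
  | cons mv t ih =>
    intro st hs c hc v
    rw [List.foldl_cons]
    have hs' := (pvMoveL_basic m H W d f st mv hs).1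
    have ihm := (ih (pvMoveL m H W d f st mv) hs' c hc v).1
    have ihn := (ih (pvMoveL m H W d f st mv) hs' c hc v).2
    have hm := pvMoveL_marked m H W d f st mv hs c hc v
    have hm1 := pvMoveL_marked m H W d f st mv hs c hc (d + 1)
    have hn := pvMoveL_none m H W d f st mv hs c hc
    constructor
    · rw [ihm, hm, hn]
      constructor
      · rintro ((h | ⟨h1, h2, h3, h4⟩) | ⟨⟨h1, h2⟩, hex, h3, h4⟩)
        · exact Or.inl h
        · exact Or.inr ⟨h1, ⟨mv, List.mem_cons_self, h2⟩, h3, h4⟩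
        · obtain ⟨mv', hmv', hc'⟩ := hex
          exact Or.inr ⟨h1, ⟨mv', List.mem_cons_of_mem _ hmv', hc'⟩, h3, h4⟩
      · rintro (h | ⟨h1, ⟨mv', hmv', hc'⟩, h3, h4⟩)
        · exact Or.inl (Or.inl h)
        · rcases List.mem_cons.mp hmv' with rfl | hmv''
          · exact Or.inl (Or.inr ⟨h1, hc', h3, h4⟩)
          · by_cases hhead : c = (f.1 + mv.1, f.2 + mv.2) ∧ pvInB H W c
            · exact Or.inl (Or.inr ⟨h1, hhead.1, h3, h4⟩)
            · exact Or.inr ⟨⟨h1, hhead⟩, ⟨mv', hmv'', hc'⟩, h3, h4⟩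
    · rw [ihn, hn]
      constructor
      · rintro ⟨⟨h1, h2⟩, h3⟩
        refine ⟨h1, ?_⟩
        rintro ⟨⟨mv', hmv', hc'⟩, hcin⟩
        rcases List.mem_cons.mp hmv' with rfl | hmv''
        · exact h2 ⟨hc', hcin⟩
        · exact h3 ⟨⟨mv', hmv'', hc'⟩, hcin⟩
      · rintro ⟨h1, h2⟩
        refine ⟨⟨h1, ?_⟩, ?_⟩
        · rintro ⟨hc', hcin⟩
          exact h2 ⟨⟨mv, List.mem_cons_self, hc'⟩, hcin⟩
        · rintro ⟨⟨mv', hmv', hc'⟩, hcin⟩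
          exact h2 ⟨⟨mv', List.mem_cons_of_mem _ hmv', hc'⟩, hcin⟩

-- effect of one frontier cell on the pending list, as an iff
theorem pvStepL_front (m : List (List Int)) (H W : Nat) (d : Int) (f : Int × Int) :
    ∀ (mvs : List (Int × Int)) (st : List (List (Option Int)) × List (Int × Int)),
      pvShape st.1 H W → ∀ (x : Int × Int), pvInB H W x →
      (x ∈ (mvs.foldl (pvMoveL m H W d f) st).2 ↔
        (x ∈ st.2 ∨
          (pvGet2 st.1 x.1 x.2 = none ∧ (∃ mv ∈ mvs, x = (f.1 + mv.1, f.2 + mv.2)) ∧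
            pvInB H W x ∧ pvMapGet m x.1 x.2 ≠ 1))) := by
  intro mvs
  induction mvs with
  | nil =>
    intro st hs x hx
    simp
  | cons mv t ih =>
    intro st hs x hx
    rw [List.foldl_cons]
    have hs' := (pvMoveL_basic m H W d f st mv hs).1
    rw [ih (pvMoveL m H W d f st mv) hs' x hx, pvMoveL_front m H W d f st mv x,
      pvMoveL_none m H W d f st mv hs x hx]
    constructor
    · rintro ((h | ⟨h1, h2, h3, h4⟩) | ⟨⟨h1, h2⟩, ⟨mv', hmv', hc'⟩, h3, h4⟩)
      · exact Or.inl h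
      · exact Or.inr ⟨h1, ⟨mv, List.mem_cons_self, h2⟩, h3, h4⟩
      · exact Or.inr ⟨h1, ⟨mv', List.mem_cons_of_mem _ hmv', hc'⟩, h3, h4⟩
    · rintro (h | ⟨h1, ⟨mv', hmv', hc'⟩, h3, h4⟩)
      · exact Or.inl (Or.inl h)
      · rcases List.mem_cons.mp hmv' with rfl | hmv''
        · exact Or.inl (Or.inr ⟨h1, hc', h3, h4⟩)
        · by_cases hhead : x = (f.1 + mv.1, f.2 + mv.2) ∧ pvInB H W x
          · exact Or.inl (Or.inr ⟨h1, hhead.1, h3, h4⟩)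
          · exact Or.inr ⟨⟨h1, hhead⟩, ⟨mv', hmv'', hc'⟩, h3, h4⟩

-- effect of one whole level on grid and next frontier, as an iff
theorem pvLevelL_effect (m : List (List Int)) (H W : Nat) (d : Int) :
    ∀ (fr : List (Int × Int)) (p : List (List (Option Int))) (acc : List (Int × Int)),
      pvShape p H W →
      (∀ (c : Int × Int), pvInB H W c → ∀ (v : Int),
        (pvGet2 (fr.foldl (pvStepL m H W d) (p, acc)).1 c.1 c.2 = some v ↔
          (pvGet2 p c.1 c.2 = some v ∨
            (pvGet2 p c.1 c.2 = none ∧ (∃ f ∈ fr, pvAdj f c) ∧ pvInB H W c ∧ v = d + 1))) ∧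
        (pvGet2 (fr.foldl (pvStepL m H W d) (p, acc)).1 c.1 c.2 = none ↔
          (pvGet2 p c.1 c.2 = none ∧ ¬ ((∃ f ∈ fr, pvAdj f c) ∧ pvInB H W c)))) ∧
      (∀ (x : Int × Int), pvInB H W x →
        (x ∈ (fr.foldl (pvStepL m H W d) (p, acc)).2 ↔
          (x ∈ acc ∨
            (pvGet2 p x.1 x.2 = none ∧ (∃ f ∈ fr, pvAdj f x) ∧ pvInB H W x ∧
              pvMapGet m x.1 x.2 ≠ 1)))) := by
  intro fr
  induction fr with
  | nil =>
    intro p acc hs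
    refine ⟨fun c hc v => ⟨by simp, by simp⟩, fun x hx => by simp⟩
  | cons f t ih =>
    intro p acc hs
    rw [List.foldl_cons]
    have hs' := (pvStepL_basic m H W d f (p, acc) hs).1
    have hstep := pvStepL m H W d (p, acc) f
    obtain ⟨ihm, ihf⟩ := ih (pvStepL m H W d (p, acc) f).1 (pvStepL m H W d (p, acc) f).2 hs'
    have hrw : ((pvStepL m H W d (p, acc) f).1, (pvStepL m H W d (p, acc) f).2)
        = pvStepL m H W d (p, acc) f := rfl
    rw [hrw] at ihm ihf
    simp only [pvStepL] at ihm ihf ⊢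
    constructor
    · intro c hc v
      have hsm := (pvStepL_marked m H W d f pvMoves (p, acc) hs c hc v).1
      have hsm1 := (pvStepL_marked m H W d f pvMoves (p, acc) hs c hc v).2
      obtain ⟨ihm1, ihm2⟩ := ihm c hc v
      constructor
      · rw [ihm1, hsm, hsm1]
        constructor
        · rintro ((h | ⟨h1, h2, h3, h4⟩) | ⟨⟨h1, h2⟩, ⟨f', hf', ha'⟩, h3, h4⟩)
          · exact Or.inl h
          · exact Or.inr ⟨h1, ⟨f, List.mem_cons_self, h2⟩, h3, h4⟩
          · exact Or.inr ⟨h1, ⟨f', List.mem_cons_of_mem _ hf', ha'⟩, h3, h4⟩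
        · rintro (h | ⟨h1, ⟨f', hf', ha'⟩, h3, h4⟩)
          · exact Or.inl (Or.inl h)
          · rcases List.mem_cons.mp hf' with rfl | hf''
            · exact Or.inl (Or.inr ⟨h1, ha', h3, h4⟩)
            · by_cases hhead : pvAdj f c ∧ pvInB H W c
              · exact Or.inl (Or.inr ⟨h1, hhead.1, h3, h4⟩)
              · exact Or.inr ⟨⟨h1, fun hcon => hhead ⟨hcon.1, hcon.2⟩⟩, ⟨f', hf'', ha'⟩, h3, h4⟩
      · rw [ihm2, hsm1]
        constructor
        · rintro ⟨⟨h1, h2⟩, h3⟩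
          refine ⟨h1, ?_⟩
          rintro ⟨⟨f', hf', ha'⟩, hcin⟩
          rcases List.mem_cons.mp hf' with rfl | hf''
          · exact h2 ⟨ha', hcin⟩
          · exact h3 ⟨⟨f', hf'', ha'⟩, hcin⟩
        · rintro ⟨h1, h2⟩
          refine ⟨⟨h1, ?_⟩, ?_⟩
          · rintro ⟨ha', hcin⟩
            exact h2 ⟨⟨f, List.mem_cons_self, ha'⟩, hcin⟩
          · rintro ⟨⟨f', hf', ha'⟩, hcin⟩
            exact h2 ⟨⟨f', List.mem_cons_of_mem _ hf', ha'⟩, hcin⟩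
    · intro x hx
      have hsf := pvStepL_front m H W d f pvMoves (p, acc) hs x hx
      have hsn := (pvStepL_marked m H W d f pvMoves (p, acc) hs x hx 0).2
      rw [ihf x hx, hsf, hsn]
      constructor
      · rintro ((h | ⟨h1, h2, h3, h4⟩) | ⟨⟨h1, h2⟩, ⟨f', hf', ha'⟩, h3, h4⟩)
        · exact Or.inl h
        · exact Or.inr ⟨h1, ⟨f, List.mem_cons_self, h2⟩, h3, h4⟩
        · exact Or.inr ⟨h1, ⟨f', List.mem_cons_of_mem _ hf', ha'⟩, h3, h4⟩
      · rintro (h | ⟨h1, ⟨f', hf', ha'⟩, h3, h4⟩)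
        · exact Or.inl (Or.inl h)
        · rcases List.mem_cons.mp hf' with rfl | hf''
          · exact Or.inl (Or.inr ⟨h1, ha', h3, h4⟩)
          · by_cases hhead : pvAdj f x ∧ pvInB H W x
            · exact Or.inl (Or.inr ⟨h1, hhead.1, h3, h4⟩)
            · exact Or.inr ⟨⟨h1, fun hcon => hhead ⟨hcon.1, hcon.2⟩⟩, ⟨f', hf'', ha'⟩, h3, h4⟩

-- ---------- Part 4b: the level invariant and its maintenance ----------

def pvInvL (m : List (List Int)) (s : Int × Int) (k : Nat)
    (p : List (List (Option Int))) (fr : List (Int × Int)) : Prop :=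
  pvShape p (pvHh m) (pvWw m) ∧
  (∀ c, pvInb m c → ∀ v, (pvGet2 p c.1 c.2 = some v ↔
     (pvReach (pvES m s) s c ∧ pvDist (pvES m s) s c ≤ k ∧ v = (pvDist (pvES m s) s c : Int) + 1))) ∧
  (∀ x, x ∈ fr ↔ (pvInb m x ∧ pvReach (pvES m s) s x ∧ pvDist (pvES m s) s x = k ∧ pvOpenS m s x))

theorem pvInvL_unmarked (m : List (List Int)) (s : Int × Int) (k : Nat)
    (p : List (List (Option Int))) (fr : List (Int × Int)) (hinv : pvInvL m s k p fr)
    (c : Int × Int) (hc : pvInb m c)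
    (hd : ¬ (pvReach (pvES m s) s c ∧ pvDist (pvES m s) s c ≤ k)) :
    pvGet2 p c.1 c.2 = none := by
  cases hv : pvGet2 p c.1 c.2 with
  | none => rfl
  | some w =>
    obtain ⟨hr, hle, _⟩ := (hinv.2.1 c hc w).mp hv
    exact absurd ⟨hr, hle⟩ hd

theorem pvInvL_step (m : List (List Int)) (s : Int × Int) (k : Nat)
    (p : List (List (Option Int))) (fr : List (Int × Int)) (hinv : pvInvL m s k p fr) :
    pvInvL m s (k + 1)
      (fr.foldl (pvStepL m (pvHh m : Int) (pvWw m : Int) ((k : Int) + 1)) (p, [])).1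
      (fr.foldl (pvStepL m (pvHh m : Int) (pvWw m : Int) ((k : Int) + 1)) (p, [])).2 := by
  obtain ⟨hs, hm, hf⟩ := hinv
  obtain ⟨heffm, hefff⟩ :=
    pvLevelL_effect m (pvHh m) (pvWw m) ((k : Int) + 1) fr p [] hs
  have hlinv := pvLevel_inv m (pvHh m) (pvWw m) ((k : Int) + 1) fr p [] hs (by simp)
  refine ⟨hlinv.1, ?_, ?_⟩
  · intro c hc v
    rw [(heffm c hc v).1]
    constructor
    · rintro (h | ⟨hnone, ⟨f, hffr, hadj⟩, hcin, hv⟩)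
      · obtain ⟨hr, hle, hveq⟩ := (hm c hc v).mp h
        exact ⟨hr, by omega, hveq⟩
      · obtain ⟨hfin, hfr, hfd, hfop⟩ := (hf f).mp hffr
        have hRk : pvReachN (pvES m s) s k f := by
          rw [← hfd]; exact pvReachN_dist _ _ _ hfr
        have hE : pvES m s f c := ⟨hfin, hc, hadj, hfop⟩
        have hRk1 : pvReachN (pvES m s) s (k + 1) c := ⟨f, hRk, hE⟩
        have hr : pvReach (pvES m s) s c := ⟨k + 1, hRk1⟩
        have hle := pvDist_le (pvES m s) s c (k + 1) hRk1
        have hgt : ¬ pvDist (pvES m s) s c ≤ k := by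
          intro hle'
          have := (hm c hc ((pvDist (pvES m s) s c : Int) + 1)).mpr ⟨hr, hle', rfl⟩
          rw [this] at hnone; cases hnone
        have hdeq : pvDist (pvES m s) s c = k + 1 := by omega
        refine ⟨hr, by omega, ?_⟩
        rw [hdeq, hv]
        push_cast
        ring
    · rintro ⟨hr, hle, hveq⟩
      by_cases hk : pvDist (pvES m s) s c ≤ k
      · exact Or.inl ((hm c hc v).mpr ⟨hr, hk, hveq⟩)
      · have hdeq : pvDist (pvES m s) s c = k + 1 := by omega
        have hnone := pvInvL_unmarked m s k p fr ⟨hs, hm, hf⟩ c hc (by tauto)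
        obtain ⟨f, hRk, hfd, hE⟩ := pvDist_pred (pvES m s) s c k hr hdeq
        have hffr : f ∈ fr := (hf f).mpr ⟨hE.1, ⟨k, hRk⟩, hfd, hE.2.2.2⟩
        refine Or.inr ⟨hnone, ⟨f, hffr, hE.2.2.1⟩, hc, ?_⟩
        rw [hveq, hdeq]
        push_cast
        ring
  · intro x
    constructor
    · intro hx
      have hxin : pvInb m x := (hlinv.2.1 x hx).1
      rcases (hefff x hxin).mp hx with h | ⟨hnone, ⟨f, hffr, hadj⟩, _, hne1⟩
      · cases h
      · obtain ⟨hfin, hfr, hfd, hfop⟩ := (hf f).mp hffr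
        have hRk : pvReachN (pvES m s) s k f := by
          rw [← hfd]; exact pvReachN_dist _ _ _ hfr
        have hRk1 : pvReachN (pvES m s) s (k + 1) x := ⟨f, hRk, ⟨hfin, hxin, hadj, hfop⟩⟩
        have hr : pvReach (pvES m s) s x := ⟨k + 1, hRk1⟩
        have hle := pvDist_le (pvES m s) s x (k + 1) hRk1
        have hgt : ¬ pvDist (pvES m s) s x ≤ k := by
          intro hle'
          have := (hm x hxin ((pvDist (pvES m s) s x : Int) + 1)).mpr ⟨hr, hle', rfl⟩
          rw [this] at hnone; cases hnone
        exact ⟨hxin, hr, by omega, Or.inr hne1⟩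
    · rintro ⟨hxin, hr, hd, hop⟩
      have hne1 : pvMapGet m x.1 x.2 ≠ 1 := by
        rcases hop with hxs | h
        · exfalso
          rw [hxs, pvDist_s] at hd
          omega
        · exact h
      have hnone := pvInvL_unmarked m s k p fr ⟨hs, hm, hf⟩ x hxin (by omega)
      obtain ⟨f, hRk, hfd, hE⟩ := pvDist_pred (pvES m s) s x k hr hd
      have hffr : f ∈ fr := (hf f).mpr ⟨hE.1, ⟨k, hRk⟩, hfd, hE.2.2.2⟩
      exact (hefff x hxin).mpr (Or.inr ⟨hnone, ⟨f, hffr, hE.2.2.1⟩, hxin, hne1⟩)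

-- once the frontier is empty every reachable cell has been reached
theorem pvStallL (m : List (List Int)) (s : Int × Int) (k : Nat)
    (p : List (List (Option Int))) (hinv : pvInvL m s k p []) :
    ∀ c, pvReach (pvES m s) s c → pvDist (pvES m s) s c ≤ k := by
  intro c hr
  by_contra hgt
  push Not at hgt
  have hR := pvReachN_dist (pvES m s) s c hr
  obtain ⟨y, hRy, hdy⟩ := pvDist_prefix (pvES m s) s c _ hR rfl (k + 1) (by omega)
  obtain ⟨f, hRk, hfd, hE⟩ := pvDist_pred (pvES m s) s y k ⟨k + 1, hRy⟩ hdy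
  exact absurd ((hinv.2.2 f).mpr ⟨hE.1, ⟨k, hRk⟩, hfd, hE.2.2.2⟩) (List.not_mem_nil)

-- ---------- Part 4c: a realized distance is bounded by the cell count ----------

def pvCells (m : List (List Int)) : Finset (Int × Int) :=
  (Finset.range (pvHh m) ×ˢ Finset.range (pvWw m)).image (fun q => ((q.1 : Int), (q.2 : Int)))

theorem pvCells_card (m : List (List Int)) : (pvCells m).card = pvHh m * pvWw m := by
  unfold pvCells
  rw [Finset.card_image_of_injective]
  · simp [Finset.card_product]
  · intro a b hab
    have h1 := congrArg Prod.fst hab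
    have h2 := congrArg Prod.snd hab
    simp only at h1 h2
    exact Prod.ext (by exact_mod_cast h1) (by exact_mod_cast h2)

theorem pvCells_mem (m : List (List Int)) (c : Int × Int) (hc : pvInb m c) : c ∈ pvCells m := by
  obtain ⟨h1, h2, h3, h4⟩ := hc
  refine Finset.mem_image.mpr ⟨(c.1.toNat, c.2.toNat), ?_, ?_⟩
  · rw [Finset.mem_product]
    constructor <;> rw [Finset.mem_range] <;> omega
  · exact Prod.ext (by omega) (by omega)

theorem pvCardL (m : List (List Int)) (s : Int × Int) (hin : pvInb m s) (k : Nat)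
    (hx : ∃ x, pvInb m x ∧ pvReach (pvES m s) s x ∧ pvDist (pvES m s) s x = k) :
    k < pvHh m * pvWw m := by
  obtain ⟨x, hxin, hxr, hxd⟩ := hx
  have hpre : ∀ t, t ≤ k → ∃ y, pvInb m y ∧ pvReach (pvES m s) s y ∧ pvDist (pvES m s) s y = t := by
    intro t ht
    have hR : pvReachN (pvES m s) s k x := by rw [← hxd]; exact pvReachN_dist _ _ _ hxr
    obtain ⟨y, hRy, hdy⟩ := pvDist_prefix (pvES m s) s x k hR hxd t ht
    refine ⟨y, ?_, ⟨t, hRy⟩, hdy⟩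
    cases t with
    | zero => rw [show y = s from hRy]; exact hin
    | succ t => obtain ⟨q, _, hE⟩ := hRy; exact hE.2.1
  classical
  have hcard := Finset.card_le_card_of_injOn
    (f := fun t => if h : t ≤ k then Classical.choose (hpre t h) else s)
    (s := Finset.range (k + 1)) (t := pvCells m) ?_ ?_
  · rw [Finset.card_range, pvCells_card m] at hcard
    omega
  · intro t ht
    have ht' : t < k + 1 := by simpa using ht
    simp only []
    rw [dif_pos (by omega : t ≤ k)]
    exact pvCells_mem m _ (Classical.choose_spec (hpre t (by omega))).1
  · intro t1 ht1 t2 ht2 heq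
    have ht1' : t1 < k + 1 := by simpa using ht1
    have ht2' : t2 < k + 1 := by simpa using ht2
    simp only [] at heq
    rw [dif_pos (by omega : t1 ≤ k), dif_pos (by omega : t2 ≤ k)] at heq
    have hd1 := (Classical.choose_spec (hpre t1 (by omega : t1 ≤ k))).2.2
    have hd2 := (Classical.choose_spec (hpre t2 (by omega : t2 ≤ k))).2.2
    rw [heq] at hd1
    rw [hd1] at hd2
    omega

-- ---------- Part 4d: running the loop to its limit ----------

theorem pvLimitL (m : List (List Int)) (s : Int × Int) (hin : pvInb m s) :
    ∀ (fuel k : Nat) (p : List (List (Option Int))) (fr : List (Int × Int)),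
      pvInvL m s k p fr → pvHh m * pvWw m + 2 ≤ fuel + k →
      ∀ c, pvInb m c → ∀ v,
        (pvGet2 (pvLoopL m (pvHh m : Int) (pvWw m : Int) fuel p fr ((k : Int) + 1)) c.1 c.2 = some v ↔
          (pvReach (pvES m s) s c ∧ v = (pvDist (pvES m s) s c : Int) + 1)) := by
  intro fuel
  induction fuel with
  | zero =>
    intro k p fr hinv hb c hc v
    have hfr : fr = [] := by
      cases fr with
      | nil => rfl
      | cons x t =>
        exfalso
        obtain ⟨hxin, hxr, hxd, _⟩ := (hinv.2.2 x).mp List.mem_cons_self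
        have := pvCardL m s hin k ⟨x, hxin, hxr, hxd⟩
        omega
    subst hfr
    rw [show pvLoopL m (pvHh m : Int) (pvWw m : Int) 0 p [] ((k : Int) + 1) = p from rfl]
    rw [hinv.2.1 c hc v]
    have hstall := pvStallL m s k p hinv
    constructor
    · rintro ⟨hr, _, hv⟩; exact ⟨hr, hv⟩
    · rintro ⟨hr, hv⟩; exact ⟨hr, hstall c hr, hv⟩
  | succ fuel ih =>
    intro k p fr hinv hb c hc v
    cases fr with
    | nil =>
      rw [pvLoopL_nil]
      rw [hinv.2.1 c hc v]
      have hstall := pvStallL m s k p hinv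
      constructor
      · rintro ⟨hr, _, hv⟩; exact ⟨hr, hv⟩
      · rintro ⟨hr, hv⟩; exact ⟨hr, hstall c hr, hv⟩
    | cons x rest =>
      have hstep : pvLoopL m (pvHh m : Int) (pvWw m : Int) (fuel + 1) p (x :: rest) ((k : Int) + 1)
          = pvLoopL m (pvHh m : Int) (pvWw m : Int) fuel
              ((x :: rest).foldl (pvStepL m (pvHh m : Int) (pvWw m : Int) ((k : Int) + 1)) (p, [])).1
              ((x :: rest).foldl (pvStepL m (pvHh m : Int) (pvWw m : Int) ((k : Int) + 1)) (p, [])).2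
              (((k : Int) + 1) + 1) := rfl
    -- realign the counter with the level index
      have hcast : ((k : Int) + 1) + 1 = (((k + 1 : Nat)) : Int) + 1 := by push_cast; ring
      rw [hstep, hcast]
      exact ih (k + 1) _ _ (pvInvL_step m s k p (x :: rest) hinv) (by omega) c hc v

-- blank grids hold no marks
theorem pvGet2_blank (H W : Nat) (a b : Int) :
    pvGet2 (List.replicate H (List.replicate W (none : Option Int))) a b = none := by
  unfold pvGet2
  rcases Nat.lt_or_ge a.toNat H with h | h
  · rw [List.getElem?_replicate, if_pos h]
    simp only [Option.getD_some]
    rcases Nat.lt_or_ge b.toNat W with h2 | h2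
    · rw [List.getElem?_replicate, if_pos h2]
      rfl
    · rw [List.getElem?_replicate, if_neg (by omega)]
      rfl
  · rw [List.getElem?_replicate, if_neg (by omega)]
    rfl

theorem pvGCA_proof (m : List (List Int)) (s : Int × Int) (hin : pvInb m s) :
    ∀ c, pvInb m c → ∀ v, pvGet2 (pvLvl m s.1 s.2) c.1 c.2 = some v ↔
      (pvReach (pvES m s) s c ∧ v = (pvDist (pvES m s) s c : Int) + 1) := by
  intro c hc v
  have hshape0 : pvShape (List.replicate (pvHh m) (List.replicate (pvWw m) (none : Option Int)))
      (pvHh m) (pvWw m) := by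
    refine ⟨by simp, ?_⟩
    intro row hrow
    rw [List.eq_of_mem_replicate hrow]
    simp
  have hinv0 : pvInvL m s 0
      (pvSet2 (List.replicate (pvHh m) (List.replicate (pvWw m) (none : Option Int))) s.1 s.2 1)
      [(s.1, s.2)] := by
    refine ⟨pvShape_set2 _ _ _ _ _ _ hshape0 hin, ?_, ?_⟩
    · intro c' hc' v'
      rw [pvGet2_set2 _ _ _ _ _ _ _ _ hshape0 hin hc']
      by_cases heq : s.1 = c'.1 ∧ s.2 = c'.2
      · rw [if_pos heq]
        have hcs : c' = s := Prod.ext heq.1.symm heq.2.symm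
        rw [hcs, pvDist_s]
        constructor
        · intro h
          injection h with h'
          exact ⟨⟨0, pvReachN_zero _ _⟩, le_refl _, by omega⟩
        · rintro ⟨_, _, hv⟩
          rw [hv]
          norm_num
      · rw [if_neg heq, pvGet2_blank]
        constructor
        · intro h; cases h
        · rintro ⟨hr, hle, _⟩
          exfalso
          have hd0 : pvDist (pvES m s) s c' = 0 := by omega
          have hR0 : pvReachN (pvES m s) s 0 c' := by
            rw [← hd0]; exact pvReachN_dist _ _ _ hr
          exact heq ⟨(congrArg Prod.fst (hR0 : c' = s)).symm, (congrArg Prod.snd (hR0 : c' = s)).symm⟩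
    · intro x
      simp only [List.mem_singleton]
      constructor
      · rintro rfl
        refine ⟨by simpa using hin, ⟨0, ?_⟩, ?_, ?_⟩
        · show (s.1, s.2) = s
          exact rfl
        · have : (s.1, s.2) = s := rfl
          rw [this, pvDist_s]
        · left
          rfl
      · rintro ⟨hxin, hr, hd, _⟩
        have hR0 : pvReachN (pvES m s) s 0 x := by
          rw [← hd]; exact pvReachN_dist _ _ _ hr
        rw [show x = s from hR0]
  have hlim := pvLimitL m s hin (pvHh m * pvWw m + 2) 0 _ _ hinv0 (by omega) c hc v
  norm_num at hlim
  simp only [pvHh, pvWw] at hlim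
  simp only [pvLvl]
  exact hlim

-- ---------- Part 4e: effect lemmas for the augmented BFS of Source B ----------

-- the new broke value Source B computes for a step onto cell t (None = step refused)
def pvNbv (m : List (List Int)) (g : Int × Int) (b : Int) (t : Int × Int) : Option Int :=
  if pvMapGet m t.1 t.2 ≠ 1 ∨ t = ((0 : Int), (0 : Int)) ∨ t = g then some b
  else if b = 0 then some 1 else none

theorem pvBi_inj {a b : Bool} (h : pvBi a = pvBi b) : a = b := by
  cases a <;> cases b <;> simp [pvBi] at h ⊢

theorem pvSet3_shape (d : List (List (Option Int)) × List (List (Option Int))) (H W : Nat)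
    (nb x y : Int) (v : Int) (hs1 : pvShape d.1 H W) (hs2 : pvShape d.2 H W)
    (hx : pvInB H W (x, y)) :
    pvShape (pvSet3 d nb x y v).1 H W ∧ pvShape (pvSet3 d nb x y v).2 H W := by
  unfold pvSet3
  split_ifs
  · exact ⟨pvShape_set2 d.1 H W x y v hs1 hx, hs2⟩
  · exact ⟨hs1, pvShape_set2 d.2 H W x y v hs2 hx⟩

theorem pvGet3_set3 (d : List (List (Option Int)) × List (List (Option Int))) (H W : Nat)
    (j j' : Bool) (x y a b : Int) (v : Int)
    (hs1 : pvShape d.1 H W) (hs2 : pvShape d.2 H W)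
    (hx : pvInB H W (x, y)) (ha : pvInB H W (a, b)) :
    pvGet3 (pvSet3 d (pvBi j) x y v) (pvBi j') a b
      = if j = j' ∧ x = a ∧ y = b then some v else pvGet3 d (pvBi j') a b := by
  have h1 := pvGet2_set2 d.1 H W x y a b v hs1 hx ha
  have h2 := pvGet2_set2 d.2 H W x y a b v hs2 hx ha
  cases j <;> cases j' <;>
    simp only [pvBi, pvSet3, pvGet3, Bool.false_eq_true, Bool.true_eq_false, if_true, if_false,
      false_and, true_and] <;>
    norm_num
  · rw [h1]
  · rw [h2]

theorem pvNbv_form (m : List (List Int)) (g : Int × Int) (jc : Bool) (t : Int × Int) (nb : Int)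
    (h : pvNbv m g (pvBi jc) t = some nb) : ∃ jn : Bool, nb = pvBi jn := by
  unfold pvNbv at h
  split_ifs at h with h1 h2
  · exact ⟨jc, (Option.some_inj.mp h).symm⟩
  · exact ⟨true, (Option.some_inj.mp h).symm⟩

theorem pvMoveAug_marked (m : List (List Int)) (H W : Nat) (g : Int × Int) (level : Int)
    (f : Int × Int × Int) (jc : Bool) (hf2 : f.2.2 = pvBi jc)
    (st : (List (List (Option Int)) × List (List (Option Int))) × List (Int × Int × Int))
    (mv : Int × Int) (hs1 : pvShape st.1.1 H W) (hs2 : pvShape st.1.2 H W)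
    (cc : Int × Int) (hcc : pvInB H W cc) (j' : Bool) (v : Int) :
    pvGet3 (pvMoveAug m H W g level f st mv).1 (pvBi j') cc.1 cc.2 = some v ↔
      (pvGet3 st.1 (pvBi j') cc.1 cc.2 = some v ∨
        (pvGet3 st.1 (pvBi j') cc.1 cc.2 = none ∧ cc = (f.1 + mv.1, f.2.1 + mv.2) ∧ pvInB H W cc ∧
          pvNbv m g (pvBi jc) cc = some (pvBi j') ∧ v = level)) := by
  simp only [pvMoveAug]
  by_cases hg : 0 ≤ f.1 + mv.1 ∧ f.1 + mv.1 < (H : Int) ∧ 0 ≤ f.2.1 + mv.2 ∧ f.2.1 + mv.2 < (W : Int)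
  · rw [if_pos hg]
    have hnbrw : (if pvMapGet m (f.1 + mv.1) (f.2.1 + mv.2) ≠ 1 ∨
          (f.1 + mv.1, f.2.1 + mv.2) = ((0 : Int), (0 : Int)) ∨ (f.1 + mv.1, f.2.1 + mv.2) = g
        then some f.2.2 else if f.2.2 = 0 then some 1 else none)
        = pvNbv m g (pvBi jc) (f.1 + mv.1, f.2.1 + mv.2) := by
      rw [hf2]; rfl
    rw [hnbrw]
    cases hnbv : pvNbv m g (pvBi jc) (f.1 + mv.1, f.2.1 + mv.2) with
    | none =>
      simp only []
      constructor
      · exact Or.inl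
      · rintro (h | ⟨_, rfl, _, hsome, _⟩)
        · exact h
        · rw [hnbv] at hsome; cases hsome
    | some nb =>
      obtain ⟨jn, rfl⟩ := pvNbv_form m g jc _ nb hnbv
      simp only []
      by_cases hmk : pvGet3 st.1 (pvBi jn) (f.1 + mv.1) (f.2.1 + mv.2) = none
      · rw [if_pos hmk]
        have hit : pvInB H W (f.1 + mv.1, f.2.1 + mv.2) := ⟨hg.1, hg.2.1, hg.2.2.1, hg.2.2.2⟩
        have hset := pvGet3_set3 st.1 H W jn j' (f.1 + mv.1) (f.2.1 + mv.2) cc.1 cc.2 level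
          hs1 hs2 hit hcc
        rw [hset]
        by_cases heq : jn = j' ∧ f.1 + mv.1 = cc.1 ∧ f.2.1 + mv.2 = cc.2
        · rw [if_pos heq]
          have hceq : cc = (f.1 + mv.1, f.2.1 + mv.2) := Prod.ext heq.2.1.symm heq.2.2.symm
          have hnone : pvGet3 st.1 (pvBi j') cc.1 cc.2 = none := by
            rw [hceq, ← heq.1]; exact hmk
          constructor
          · intro h
            exact Or.inr ⟨hnone, hceq, hcc, by rw [hceq, ← heq.1]; exact hnbv,
              by injection h with h'; omega⟩
          · rintro (h | ⟨_, _, _, _, rfl⟩)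
            · rw [hnone] at h; cases h
            · rfl
        · rw [if_neg heq]
          constructor
          · exact Or.inl
          · rintro (h | ⟨_, hceq, _, hsome, _⟩)
            · exact h
            · exfalso
              rw [hceq] at hsome
              rw [hnbv] at hsome
              have : jn = j' := pvBi_inj (Option.some_inj.mp hsome)
              exact heq ⟨this, (congrArg Prod.fst hceq).symm, (congrArg Prod.snd hceq).symm⟩
      · rw [if_neg hmk]
        constructor
        · exact Or.inl
        · rintro (h | ⟨hnone, hceq, _, hsome, _⟩)
          · exact h
          · exfalso
            rw [hceq] at hsome hnone
            rw [hnbv] at hsome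
            have : jn = j' := pvBi_inj (Option.some_inj.mp hsome)
            rw [← this] at hnone
            exact hmk hnone
  · rw [if_neg hg]
    constructor
    · exact Or.inl
    · rintro (h | ⟨_, hceq, hcin, _, _⟩)
      · exact h
      · exfalso
        rw [hceq] at hcin
        exact hg ⟨hcin.1, hcin.2.1, hcin.2.2.1, hcin.2.2.2⟩

theorem pvMoveAug_none (m : List (List Int)) (H W : Nat) (g : Int × Int) (level : Int)
    (f : Int × Int × Int) (jc : Bool) (hf2 : f.2.2 = pvBi jc)
    (st : (List (List (Option Int)) × List (List (Option Int))) × List (Int × Int × Int))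
    (mv : Int × Int) (hs1 : pvShape st.1.1 H W) (hs2 : pvShape st.1.2 H W)
    (cc : Int × Int) (hcc : pvInB H W cc) (j' : Bool) :
    pvGet3 (pvMoveAug m H W g level f st mv).1 (pvBi j') cc.1 cc.2 = none ↔
      (pvGet3 st.1 (pvBi j') cc.1 cc.2 = none ∧
        ¬ (cc = (f.1 + mv.1, f.2.1 + mv.2) ∧ pvInB H W cc ∧
            pvNbv m g (pvBi jc) cc = some (pvBi j'))) := by
  cases hcur : pvGet3 st.1 (pvBi j') cc.1 cc.2 with
  | some w =>
    have := (pvMoveAug_marked m H W g level f jc hf2 st mv hs1 hs2 cc hcc j' w).mpr (Or.inl hcur)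
    rw [this]
    simp
  | none =>
    cases hres : pvGet3 (pvMoveAug m H W g level f st mv).1 (pvBi j') cc.1 cc.2 with
    | some w =>
      rcases (pvMoveAug_marked m H W g level f jc hf2 st mv hs1 hs2 cc hcc j' w).mp hres with
        h | ⟨_, hceq, hcin, hsome, _⟩
      · rw [h] at hcur; cases hcur
      · simp only [true_and]
        constructor
        · intro h; cases h
        · intro h; exact absurd ⟨hceq, hcin, hsome⟩ h
    | none =>
      simp only [true_and, true_iff]
      rintro ⟨hceq, hcin, hsome⟩
      have := (pvMoveAug_marked m H W g level f jc hf2 st mv hs1 hs2 cc hcc j' level).mpr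
        (Or.inr ⟨hcur, hceq, hcin, hsome, rfl⟩)
      rw [this] at hres
      cases hres

theorem pvMoveAug_front (m : List (List Int)) (H W : Nat) (g : Int × Int) (level : Int)
    (f : Int × Int × Int) (jc : Bool) (hf2 : f.2.2 = pvBi jc)
    (st : (List (List (Option Int)) × List (List (Option Int))) × List (Int × Int × Int))
    (mv : Int × Int) (x : Int × Int × Int) :
    x ∈ (pvMoveAug m H W g level f st mv).2 ↔
      (x ∈ st.2 ∨
        (∃ j' : Bool, x = (f.1 + mv.1, f.2.1 + mv.2, pvBi j') ∧
          pvGet3 st.1 (pvBi j') (f.1 + mv.1) (f.2.1 + mv.2) = none ∧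
          pvInB H W (f.1 + mv.1, f.2.1 + mv.2) ∧
          pvNbv m g (pvBi jc) (f.1 + mv.1, f.2.1 + mv.2) = some (pvBi j'))) := by
  simp only [pvMoveAug]
  by_cases hg : 0 ≤ f.1 + mv.1 ∧ f.1 + mv.1 < (H : Int) ∧ 0 ≤ f.2.1 + mv.2 ∧ f.2.1 + mv.2 < (W : Int)
  · rw [if_pos hg]
    have hnbrw : (if pvMapGet m (f.1 + mv.1) (f.2.1 + mv.2) ≠ 1 ∨
          (f.1 + mv.1, f.2.1 + mv.2) = ((0 : Int), (0 : Int)) ∨ (f.1 + mv.1, f.2.1 + mv.2) = g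
        then some f.2.2 else if f.2.2 = 0 then some 1 else none)
        = pvNbv m g (pvBi jc) (f.1 + mv.1, f.2.1 + mv.2) := by
      rw [hf2]; rfl
    rw [hnbrw]
    cases hnbv : pvNbv m g (pvBi jc) (f.1 + mv.1, f.2.1 + mv.2) with
    | none =>
      simp only []
      constructor
      · exact Or.inl
      · rintro (h | ⟨j', _, _, _, hsome⟩)
        · exact h
        · cases hsome
    | some nb =>
      obtain ⟨jn, rfl⟩ := pvNbv_form m g jc _ nb hnbv
      simp only []
      by_cases hmk : pvGet3 st.1 (pvBi jn) (f.1 + mv.1) (f.2.1 + mv.2) = none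
      · rw [if_pos hmk]
        simp only [List.mem_append, List.mem_singleton]
        constructor
        · rintro (h | rfl)
          · exact Or.inl h
          · exact Or.inr ⟨jn, rfl, hmk, ⟨hg.1, hg.2.1, hg.2.2.1, hg.2.2.2⟩, rfl⟩
        · rintro (h | ⟨j', rfl, _, _, hsome⟩)
          · exact Or.inl h
          · have : jn = j' := pvBi_inj (Option.some_inj.mp hsome)
            rw [← this]
            exact Or.inr rfl
      · rw [if_neg hmk]
        constructor
        · exact Or.inl
        · rintro (h | ⟨j', rfl, hnone, _, hsome⟩)
          · exact h
          · exfalso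
            have : jn = j' := pvBi_inj (Option.some_inj.mp hsome)
            rw [← this] at hnone
            exact hmk hnone
  · rw [if_neg hg]
    constructor
    · exact Or.inl
    · rintro (h | ⟨j', rfl, _, hcin, _⟩)
      · exact h
      · exact absurd ⟨hcin.1, hcin.2.1, hcin.2.2.1, hcin.2.2.2⟩ hg

theorem pvMoveAug_shape (m : List (List Int)) (H W : Nat) (g : Int × Int) (level : Int)
    (f : Int × Int × Int)
    (st : (List (List (Option Int)) × List (List (Option Int))) × List (Int × Int × Int))
    (mv : Int × Int) (hs1 : pvShape st.1.1 H W) (hs2 : pvShape st.1.2 H W) :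
    pvShape (pvMoveAug m H W g level f st mv).1.1 H W ∧
    pvShape (pvMoveAug m H W g level f st mv).1.2 H W := by
  simp only [pvMoveAug]
  by_cases hg : 0 ≤ f.1 + mv.1 ∧ f.1 + mv.1 < (H : Int) ∧ 0 ≤ f.2.1 + mv.2 ∧ f.2.1 + mv.2 < (W : Int)
  · rw [if_pos hg]
    cases hnbv : (if pvMapGet m (f.1 + mv.1) (f.2.1 + mv.2) ≠ 1 ∨
          (f.1 + mv.1, f.2.1 + mv.2) = ((0 : Int), (0 : Int)) ∨ (f.1 + mv.1, f.2.1 + mv.2) = g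
        then some f.2.2 else if f.2.2 = 0 then some 1 else none) with
    | none => exact ⟨hs1, hs2⟩
    | some nb =>
      simp only []
      split_ifs
      · exact pvSet3_shape st.1 H W nb (f.1 + mv.1) (f.2.1 + mv.2) level hs1 hs2
          ⟨hg.1, hg.2.1, hg.2.2.1, hg.2.2.2⟩
      · exact ⟨hs1, hs2⟩
  · rw [if_neg hg]
    exact ⟨hs1, hs2⟩

-- the per-frontier-state marking condition of Source B, for target cell cc and landing flag j'
def pvTchA (m : List (List Int)) (g : Int × Int) (f : Int × Int × Int) (cc : Int × Int)
    (j' : Bool) : Prop :=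
  (∃ mv ∈ pvMoves, cc = (f.1 + mv.1, f.2.1 + mv.2)) ∧ pvNbv m g f.2.2 cc = some (pvBi j')

theorem pvStepAug_effect (m : List (List Int)) (H W : Nat) (g : Int × Int) (level : Int)
    (f : Int × Int × Int) (jc : Bool) (hf2 : f.2.2 = pvBi jc) :
    ∀ (mvs : List (Int × Int))
      (st : (List (List (Option Int)) × List (List (Option Int))) × List (Int × Int × Int)),
      pvShape st.1.1 H W → pvShape st.1.2 H W →
      pvShape (mvs.foldl (pvMoveAug m H W g level f) st).1.1 H W ∧
      pvShape (mvs.foldl (pvMoveAug m H W g level f) st).1.2 H W ∧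
      (∀ (cc : Int × Int), pvInB H W cc → ∀ (j' : Bool) (v : Int),
        (pvGet3 (mvs.foldl (pvMoveAug m H W g level f) st).1 (pvBi j') cc.1 cc.2 = some v ↔
          (pvGet3 st.1 (pvBi j') cc.1 cc.2 = some v ∨
            (pvGet3 st.1 (pvBi j') cc.1 cc.2 = none ∧
              (∃ mv ∈ mvs, cc = (f.1 + mv.1, f.2.1 + mv.2)) ∧ pvInB H W cc ∧
              pvNbv m g f.2.2 cc = some (pvBi j') ∧ v = level))) ∧
        (pvGet3 (mvs.foldl (pvMoveAug m H W g level f) st).1 (pvBi j') cc.1 cc.2 = none ↔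
          (pvGet3 st.1 (pvBi j') cc.1 cc.2 = none ∧
            ¬ ((∃ mv ∈ mvs, cc = (f.1 + mv.1, f.2.1 + mv.2)) ∧ pvInB H W cc ∧
              pvNbv m g f.2.2 cc = some (pvBi j'))))) ∧
      (∀ (x : Int × Int × Int),
        x ∈ (mvs.foldl (pvMoveAug m H W g level f) st).2 ↔
          (x ∈ st.2 ∨
            (∃ (cc : Int × Int) (j' : Bool), x = (cc.1, cc.2, pvBi j') ∧
              pvGet3 st.1 (pvBi j') cc.1 cc.2 = none ∧
              (∃ mv ∈ mvs, cc = (f.1 + mv.1, f.2.1 + mv.2)) ∧ pvInB H W cc ∧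
              pvNbv m g f.2.2 cc = some (pvBi j')))) := by
  simp only [hf2]
  intro mvs
  induction mvs with
  | nil =>
    intro st hs1 hs2
    refine ⟨hs1, hs2, fun cc hcc j' v => ⟨by simp, by simp⟩, fun x => by simp⟩
  | cons mv t ih =>
    intro st hs1 hs2
    rw [List.foldl_cons]
    obtain ⟨hs1', hs2'⟩ := pvMoveAug_shape m H W g level f st mv hs1 hs2
    obtain ⟨ihs1, ihs2, ihm, ihf⟩ := ih (pvMoveAug m H W g level f st mv) hs1' hs2'
    refine ⟨ihs1, ihs2, ?_, ?_⟩
    · intro cc hcc j' v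
      have hm := pvMoveAug_marked m H W g level f jc hf2 st mv hs1 hs2 cc hcc j'
      have hn := pvMoveAug_none m H W g level f jc hf2 st mv hs1 hs2 cc hcc j'
      obtain ⟨ihm1, ihm2⟩ := ihm cc hcc j' v
      constructor
      · rw [ihm1, hm v, hn]
        constructor
        · rintro ((h | ⟨h1, h2, h3, h4, h5⟩) | ⟨⟨h1, h2⟩, hex, h3, h4, h5⟩)
          · exact Or.inl h
          · exact Or.inr ⟨h1, ⟨mv, List.mem_cons_self, h2⟩, h3, h4, h5⟩
          · obtain ⟨mv', hmv', hc'⟩ := hex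
            exact Or.inr ⟨h1, ⟨mv', List.mem_cons_of_mem _ hmv', hc'⟩, h3, h4, h5⟩
        · rintro (h | ⟨h1, ⟨mv', hmv', hc'⟩, h3, h4, h5⟩)
          · exact Or.inl (Or.inl h)
          · rcases List.mem_cons.mp hmv' with rfl | hmv''
            · exact Or.inl (Or.inr ⟨h1, hc', h3, h4, h5⟩)
            · by_cases hhead : cc = (f.1 + mv.1, f.2.1 + mv.2) ∧ pvInB H W cc ∧
                  pvNbv m g (pvBi jc) cc = some (pvBi j')
              · exact Or.inl (Or.inr ⟨h1, hhead.1, h3, hhead.2.2, h5⟩)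
              · exact Or.inr ⟨⟨h1, hhead⟩, ⟨mv', hmv'', hc'⟩, h3, h4, h5⟩
      · rw [ihm2, hn]
        constructor
        · rintro ⟨⟨h1, h2⟩, h3⟩
          refine ⟨h1, ?_⟩
          rintro ⟨⟨mv', hmv', hc'⟩, hcin, hnbv⟩
          rcases List.mem_cons.mp hmv' with rfl | hmv''
          · exact h2 ⟨hc', hcin, hnbv⟩
          · exact h3 ⟨⟨mv', hmv'', hc'⟩, hcin, hnbv⟩
        · rintro ⟨h1, h2⟩
          refine ⟨⟨h1, ?_⟩, ?_⟩
          · rintro ⟨hc', hcin, hnbv⟩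
            exact h2 ⟨⟨mv, List.mem_cons_self, hc'⟩, hcin, hnbv⟩
          · rintro ⟨⟨mv', hmv', hc'⟩, hcin, hnbv⟩
            exact h2 ⟨⟨mv', List.mem_cons_of_mem _ hmv', hc'⟩, hcin, hnbv⟩
    · intro x
      have hfr := pvMoveAug_front m H W g level f jc hf2 st mv x
      rw [ihf x, hfr]
      constructor
      · rintro ((h | ⟨j', rfl, hnone, hcin, hnbv⟩) |
          ⟨cc, j', rfl, hnone, ⟨mv', hmv', hc'⟩, hcin, hnbv⟩)
        · exact Or.inl h
        · exact Or.inr ⟨(f.1 + mv.1, f.2.1 + mv.2), j', rfl, hnone,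
            ⟨mv, List.mem_cons_self, rfl⟩, hcin, hnbv⟩
        · have hn := pvMoveAug_none m H W g level f jc hf2 st mv hs1 hs2 cc hcin j'
          rw [hn] at hnone
          exact Or.inr ⟨cc, j', rfl, hnone.1, ⟨mv', List.mem_cons_of_mem _ hmv', hc'⟩, hcin, hnbv⟩
      · rintro (h | ⟨cc, j', rfl, hnone, ⟨mv', hmv', hc'⟩, hcin, hnbv⟩)
        · exact Or.inl (Or.inl h)
        · have hn := pvMoveAug_none m H W g level f jc hf2 st mv hs1 hs2 cc hcin j'
          rcases List.mem_cons.mp hmv' with rfl | hmv''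
          · exact Or.inl (Or.inr ⟨j', by rw [hc'], by rw [hc'] at hnone; exact hnone,
              by rw [← hc']; exact hcin, by rw [← hc']; exact hnbv⟩)
          · by_cases hhead : cc = (f.1 + mv.1, f.2.1 + mv.2) ∧ pvInB H W cc ∧
                pvNbv m g (pvBi jc) cc = some (pvBi j')
            · exact Or.inl (Or.inr ⟨j', by rw [hhead.1], by rw [hhead.1] at hnone; exact hnone,
                by rw [← hhead.1]; exact hcin, by rw [← hhead.1]; exact hhead.2.2⟩)
            · exact Or.inr ⟨cc, j', rfl, (hn.mpr ⟨hnone, hhead⟩),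
                ⟨mv', hmv'', hc'⟩, hcin, hnbv⟩

theorem pvLevelAug_effect (m : List (List Int)) (H W : Nat) (g : Int × Int) (level : Int) :
    ∀ (fr : List (Int × Int × Int))
      (p : List (List (Option Int)) × List (List (Option Int))) (acc : List (Int × Int × Int)),
      pvShape p.1 H W → pvShape p.2 H W →
      (∀ f ∈ fr, ∃ jc : Bool, f.2.2 = pvBi jc) →
      pvShape (fr.foldl (pvStepAug m H W g level) (p, acc)).1.1 H W ∧
      pvShape (fr.foldl (pvStepAug m H W g level) (p, acc)).1.2 H W ∧
      (∀ (cc : Int × Int), pvInB H W cc → ∀ (j' : Bool) (v : Int),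
        (pvGet3 (fr.foldl (pvStepAug m H W g level) (p, acc)).1 (pvBi j') cc.1 cc.2 = some v ↔
          (pvGet3 p (pvBi j') cc.1 cc.2 = some v ∨
            (pvGet3 p (pvBi j') cc.1 cc.2 = none ∧ (∃ f ∈ fr, pvTchA m g f cc j') ∧
              pvInB H W cc ∧ v = level))) ∧
        (pvGet3 (fr.foldl (pvStepAug m H W g level) (p, acc)).1 (pvBi j') cc.1 cc.2 = none ↔
          (pvGet3 p (pvBi j') cc.1 cc.2 = none ∧
            ¬ ((∃ f ∈ fr, pvTchA m g f cc j') ∧ pvInB H W cc)))) ∧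
      (∀ (x : Int × Int × Int),
        x ∈ (fr.foldl (pvStepAug m H W g level) (p, acc)).2 ↔
          (x ∈ acc ∨
            (∃ (cc : Int × Int) (j' : Bool), x = (cc.1, cc.2, pvBi j') ∧
              pvGet3 p (pvBi j') cc.1 cc.2 = none ∧ (∃ f ∈ fr, pvTchA m g f cc j') ∧
              pvInB H W cc))) := by
  intro fr
  induction fr with
  | nil =>
    intro p acc hs1 hs2 hform
    refine ⟨hs1, hs2, fun cc hcc j' v => ⟨by simp, by simp⟩, fun x => by simp⟩
  | cons f t ih =>
    intro p acc hs1 hs2 hform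
    rw [List.foldl_cons]
    obtain ⟨jc, hf2⟩ := hform f List.mem_cons_self
    have hstepeff := pvStepAug_effect m H W g level f jc hf2 pvMoves (p, acc) hs1 hs2
    obtain ⟨hss1, hss2, hsm, hsf⟩ := hstepeff
    have hstrw : pvStepAug m H W g level (p, acc) f = pvMoves.foldl (pvMoveAug m H W g level f) (p, acc) := rfl
    obtain ⟨ihs1, ihs2, ihm, ihf⟩ := ih (pvStepAug m H W g level (p, acc) f).1
        (pvStepAug m H W g level (p, acc) f).2 (by rw [hstrw]; exact hss1) (by rw [hstrw]; exact hss2)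
        (fun f' hf' => hform f' (List.mem_cons_of_mem _ hf'))
    have hrweta : ((pvStepAug m H W g level (p, acc) f).1, (pvStepAug m H W g level (p, acc) f).2)
        = pvStepAug m H W g level (p, acc) f := rfl
    rw [hrweta] at ihm ihf ihs1 ihs2
    simp only [pvStepAug] at ihs1 ihs2 ihm ihf ⊢
    refine ⟨ihs1, ihs2, ?_, ?_⟩
    · intro cc hcc j' v
      obtain ⟨ihm1, ihm2⟩ := ihm cc hcc j' v
      obtain ⟨hsm1, hsm2⟩ := hsm cc hcc j' v
      constructor
      · rw [ihm1, hsm1, hsm2]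
        constructor
        · rintro ((h | ⟨h1, h2, h3, h4, h5⟩) | ⟨⟨h1, h2⟩, ⟨f', hf', ha'⟩, h3, h4⟩)
          · exact Or.inl h
          · exact Or.inr ⟨h1, ⟨f, List.mem_cons_self, h2, h4⟩, h3, h5⟩
          · exact Or.inr ⟨h1, ⟨f', List.mem_cons_of_mem _ hf', ha'⟩, h3, h4⟩
        · rintro (h | ⟨h1, ⟨f', hf', ha'⟩, h3, h4⟩)
          · exact Or.inl (Or.inl h)
          · rcases List.mem_cons.mp hf' with rfl | hf''
            · exact Or.inl (Or.inr ⟨h1, ha'.1, h3, ha'.2, h4⟩)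
            · by_cases hhead : pvTchA m g f cc j' ∧ pvInB H W cc
              · exact Or.inl (Or.inr ⟨h1, hhead.1.1, h3, hhead.1.2, h4⟩)
              · exact Or.inr ⟨⟨h1, fun hcon => hhead ⟨⟨hcon.1, hcon.2.2⟩, hcon.2.1⟩⟩,
                  ⟨f', hf'', ha'⟩, h3, h4⟩
      · rw [ihm2, hsm2]
        constructor
        · rintro ⟨⟨h1, h2⟩, h3⟩
          refine ⟨h1, ?_⟩
          rintro ⟨⟨f', hf', ha'⟩, hcin⟩
          rcases List.mem_cons.mp hf' with rfl | hf''
          · exact h2 ⟨ha'.1, hcin, ha'.2⟩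
          · exact h3 ⟨⟨f', hf'', ha'⟩, hcin⟩
        · rintro ⟨h1, h2⟩
          refine ⟨⟨h1, ?_⟩, ?_⟩
          · rintro ⟨hmv, hcin, hnbv⟩
            exact h2 ⟨⟨f, List.mem_cons_self, hmv, hnbv⟩, hcin⟩
          · rintro ⟨⟨f', hf', ha'⟩, hcin⟩
            exact h2 ⟨⟨f', List.mem_cons_of_mem _ hf', ha'⟩, hcin⟩
    · intro x
      have hsf' := hsf x
      have ihfx := ihf x
      rw [ihfx, hsf']
      constructor
      · rintro ((h | ⟨cc, j', rfl, hnone, hmv, hcin, hnbv⟩) |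
          ⟨cc, j', rfl, hnone, ⟨f', hf', ha'⟩, hcin⟩)
        · exact Or.inl h
        · exact Or.inr ⟨cc, j', rfl, hnone, ⟨f, List.mem_cons_self, hmv, hnbv⟩, hcin⟩
        · obtain ⟨hsm1, hsm2⟩ := hsm cc hcin j' 0
          rw [hsm2] at hnone
          exact Or.inr ⟨cc, j', rfl, hnone.1, ⟨f', List.mem_cons_of_mem _ hf', ha'⟩, hcin⟩
      · rintro (h | ⟨cc, j', rfl, hnone, ⟨f', hf', ha'⟩, hcin⟩)
        · exact Or.inl (Or.inl h)
        · obtain ⟨hsm1, hsm2⟩ := hsm cc hcin j' 0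
          rcases List.mem_cons.mp hf' with rfl | hf''
          · exact Or.inl (Or.inr ⟨cc, j', rfl, hnone, ha'.1, hcin, ha'.2⟩)
          · by_cases hhead : pvTchA m g f cc j' ∧ pvInB H W cc
            · exact Or.inl (Or.inr ⟨cc, j', rfl, hnone, hhead.1.1, hcin, hhead.1.2⟩)
            · refine Or.inr ⟨cc, j', rfl, ?_, ⟨f', hf'', ha'⟩, hcin⟩
              exact hsm2.mpr ⟨hnone, fun hcon => hhead ⟨⟨hcon.1, hcon.2.2⟩, hcon.2.1⟩⟩

-- the marking condition is exactly an edge of the augmented graph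
theorem pvTchA_iff (m : List (List Int)) (ff : Int × Int) (jc : Bool) (cc : Int × Int) (j' : Bool)
    (hfin : pvInb m ff) (hccin : pvInb m cc) :
    pvTchA m (pvGoal m) (ff.1, ff.2, pvBi jc) cc j' ↔ pvEAug m (ff, jc) (cc, j') := by
  unfold pvTchA pvEAug pvAdj pvNbv
  simp only []
  by_cases hT : pvMapGet m cc.1 cc.2 ≠ 1 ∨ cc = ((0 : Int), (0 : Int)) ∨ cc = pvGoal m
  · rw [if_pos hT]
    have hfree : pvFree m cc := ⟨hccin, hT⟩
    constructor
    · rintro ⟨hadj, hsome⟩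
      exact ⟨hfin, hccin, hadj, Or.inl ⟨hfree, (pvBi_inj (Option.some_inj.mp hsome)).symm⟩⟩
    · rintro ⟨_, _, hadj, hlast⟩
      refine ⟨hadj, ?_⟩
      rcases hlast with ⟨_, hj⟩ | ⟨hnf, _, _⟩
      · rw [hj]
      · exact absurd hfree hnf
  · rw [if_neg hT]
    have hnfree : ¬ pvFree m cc := fun hcon => hT hcon.2
    constructor
    · rintro ⟨hadj, hsome⟩
      split_ifs at hsome with hb0
      · have hjc : jc = false := by
          cases jc
          · rfl
          · simp [pvBi] at hb0
        have hj' : j' = true := by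
          cases j'
          · simp [pvBi] at hsome
          · rfl
        exact ⟨hfin, hccin, hadj, Or.inr ⟨hnfree, hjc, hj'⟩⟩
    · rintro ⟨_, _, hadj, hlast⟩
      rcases hlast with ⟨hfree, _⟩ | ⟨_, hjc, hj'⟩
      · exact absurd hfree hnfree
      · subst hjc; subst hj'
        exact ⟨hadj, by norm_num [pvBi]⟩

def pvInvAug (m : List (List Int)) (k : Nat)
    (d : List (List (Option Int)) × List (List (Option Int))) (fr : List (Int × Int × Int)) : Prop :=
  pvShape d.1 (pvHh m) (pvWw m) ∧ pvShape d.2 (pvHh m) (pvWw m) ∧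
  (∀ cc, pvInb m cc → ∀ (j : Bool) (v : Int), (pvGet3 d (pvBi j) cc.1 cc.2 = some v ↔
      (pvReach (pvEAug m) ((0, 0), false) (cc, j) ∧
        pvDist (pvEAug m) ((0, 0), false) (cc, j) ≤ k ∧
        v = (pvDist (pvEAug m) ((0, 0), false) (cc, j) : Int) + 1))) ∧
  (∀ x, x ∈ fr ↔ (∃ (cc : Int × Int) (j : Bool), x = (cc.1, cc.2, pvBi j) ∧ pvInb m cc ∧
      pvReach (pvEAug m) ((0, 0), false) (cc, j) ∧
      pvDist (pvEAug m) ((0, 0), false) (cc, j) = k))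

theorem pvInvAug_unmarked (m : List (List Int)) (k : Nat)
    (d : List (List (Option Int)) × List (List (Option Int))) (fr : List (Int × Int × Int))
    (hinv : pvInvAug m k d fr) (cc : Int × Int) (hcc : pvInb m cc) (j : Bool)
    (hd : ¬ (pvReach (pvEAug m) ((0, 0), false) (cc, j) ∧
        pvDist (pvEAug m) ((0, 0), false) (cc, j) ≤ k)) :
    pvGet3 d (pvBi j) cc.1 cc.2 = none := by
  cases hv : pvGet3 d (pvBi j) cc.1 cc.2 with
  | none => rfl
  | some w =>
    obtain ⟨hr, hle, _⟩ := (hinv.2.2.1 cc hcc j w).mp hv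
    exact absurd ⟨hr, hle⟩ hd

theorem pvInvAug_step (m : List (List Int)) (h00 : pvInb m (0, 0)) (k : Nat)
    (d : List (List (Option Int)) × List (List (Option Int))) (fr : List (Int × Int × Int))
    (hinv : pvInvAug m k d fr) :
    pvInvAug m (k + 1)
      (fr.foldl (pvStepAug m (pvHh m : Int) (pvWw m : Int) (pvGoal m) ((k : Int) + 2)) (d, [])).1
      (fr.foldl (pvStepAug m (pvHh m : Int) (pvWw m : Int) (pvGoal m) ((k : Int) + 2)) (d, [])).2 := by
  obtain ⟨hs1, hs2, hm, hf⟩ := hinv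
  have hform : ∀ f ∈ fr, ∃ jc : Bool, f.2.2 = pvBi jc := by
    intro f hffr
    obtain ⟨cc, j, rfl, _⟩ := (hf f).mp hffr
    exact ⟨j, rfl⟩
  obtain ⟨hrs1, hrs2, heffm, hefff⟩ :=
    pvLevelAug_effect m (pvHh m) (pvWw m) (pvGoal m) ((k : Int) + 2) fr d [] hs1 hs2 hform
  refine ⟨hrs1, hrs2, ?_, ?_⟩
  · intro cc hcc j v
    rw [(heffm cc hcc j v).1]
    constructor
    · rintro (h | ⟨hnone, ⟨f, hffr, htch⟩, hcin, hv⟩)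
      · obtain ⟨hr, hle, hveq⟩ := (hm cc hcc j v).mp h
        exact ⟨hr, by omega, hveq⟩
      · obtain ⟨cc', j', hfeq, hfin, hfr, hfd⟩ := (hf f).mp hffr
        rw [hfeq] at htch
        have hedge := (pvTchA_iff m cc' j' cc j hfin hcc).mp htch
        have hRk : pvReachN (pvEAug m) ((0, 0), false) k (cc', j') := by
          rw [← hfd]; exact pvReachN_dist _ _ _ hfr
        have hRk1 : pvReachN (pvEAug m) ((0, 0), false) (k + 1) (cc, j) := ⟨(cc', j'), hRk, hedge⟩
        have hr : pvReach (pvEAug m) ((0, 0), false) (cc, j) := ⟨k + 1, hRk1⟩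
        have hle := pvDist_le (pvEAug m) ((0, 0), false) (cc, j) (k + 1) hRk1
        have hgt : ¬ pvDist (pvEAug m) ((0, 0), false) (cc, j) ≤ k := by
          intro hle'
          have := (hm cc hcc j ((pvDist (pvEAug m) ((0, 0), false) (cc, j) : Int) + 1)).mpr
            ⟨hr, hle', rfl⟩
          rw [this] at hnone; cases hnone
        have hdeq : pvDist (pvEAug m) ((0, 0), false) (cc, j) = k + 1 := by omega
        refine ⟨hr, by omega, ?_⟩
        rw [hdeq, hv]
        push_cast
        ring
    · rintro ⟨hr, hle, hveq⟩
      by_cases hk : pvDist (pvEAug m) ((0, 0), false) (cc, j) ≤ k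
      · exact Or.inl ((hm cc hcc j v).mpr ⟨hr, hk, hveq⟩)
      · have hdeq : pvDist (pvEAug m) ((0, 0), false) (cc, j) = k + 1 := by omega
        have hnone := pvInvAug_unmarked m k d fr ⟨hs1, hs2, hm, hf⟩ cc hcc j (by tauto)
        obtain ⟨pp, hRk, hfd, hE⟩ := pvDist_pred (pvEAug m) ((0, 0), false) (cc, j) k hr hdeq
        have hpin : pvInb m pp.1 := pvInvInb m h00 k pp hRk
        have hffr : (pp.1.1, pp.1.2, pvBi pp.2) ∈ fr :=
          (hf _).mpr ⟨pp.1, pp.2, rfl, hpin, ⟨k, hRk⟩, hfd⟩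
        have htch : pvTchA m (pvGoal m) (pp.1.1, pp.1.2, pvBi pp.2) cc j :=
          (pvTchA_iff m pp.1 pp.2 cc j hpin hcc).mpr (by
            have : ((pp.1, pp.2) : (Int × Int) × Bool) = pp := rfl
            rw [this]; exact hE)
        refine Or.inr ⟨hnone, ⟨_, hffr, htch⟩, hcc, ?_⟩
        rw [hveq, hdeq]
        push_cast
        ring
  · intro x
    constructor
    · intro hx
      rcases (hefff x).mp hx with h | ⟨cc, j, rfl, hnone, ⟨f, hffr, htch⟩, hcin⟩
      · cases h
      · obtain ⟨cc', j', hfeq, hfin, hfr, hfd⟩ := (hf f).mp hffr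
        rw [hfeq] at htch
        have hedge := (pvTchA_iff m cc' j' cc j hfin hcin).mp htch
        have hRk : pvReachN (pvEAug m) ((0, 0), false) k (cc', j') := by
          rw [← hfd]; exact pvReachN_dist _ _ _ hfr
        have hRk1 : pvReachN (pvEAug m) ((0, 0), false) (k + 1) (cc, j) := ⟨(cc', j'), hRk, hedge⟩
        have hr : pvReach (pvEAug m) ((0, 0), false) (cc, j) := ⟨k + 1, hRk1⟩
        have hle := pvDist_le (pvEAug m) ((0, 0), false) (cc, j) (k + 1) hRk1
        have hgt : ¬ pvDist (pvEAug m) ((0, 0), false) (cc, j) ≤ k := by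
          intro hle'
          have := (hm cc hcin j ((pvDist (pvEAug m) ((0, 0), false) (cc, j) : Int) + 1)).mpr
            ⟨hr, hle', rfl⟩
          rw [this] at hnone; cases hnone
        exact ⟨cc, j, rfl, hcin, hr, by omega⟩
    · rintro ⟨cc, j, rfl, hcin, hr, hd⟩
      have hnone := pvInvAug_unmarked m k d fr ⟨hs1, hs2, hm, hf⟩ cc hcin j (by omega)
      obtain ⟨pp, hRk, hfd, hE⟩ := pvDist_pred (pvEAug m) ((0, 0), false) (cc, j) k hr hd
      have hpin : pvInb m pp.1 := pvInvInb m h00 k pp hRk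
      have hffr : (pp.1.1, pp.1.2, pvBi pp.2) ∈ fr :=
        (hf _).mpr ⟨pp.1, pp.2, rfl, hpin, ⟨k, hRk⟩, hfd⟩
      have htch : pvTchA m (pvGoal m) (pp.1.1, pp.1.2, pvBi pp.2) cc j :=
        (pvTchA_iff m pp.1 pp.2 cc j hpin hcin).mpr (by
          have : ((pp.1, pp.2) : (Int × Int) × Bool) = pp := rfl
          rw [this]; exact hE)
      exact (hefff _).mpr (Or.inr ⟨cc, j, rfl, hnone, ⟨_, hffr, htch⟩, hcin⟩)

theorem pvStallAug (m : List (List Int)) (h00 : pvInb m (0, 0)) (k : Nat)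
    (d : List (List (Option Int)) × List (List (Option Int)))
    (hinv : pvInvAug m k d []) :
    ∀ st, pvReach (pvEAug m) ((0, 0), false) st → pvDist (pvEAug m) ((0, 0), false) st ≤ k := by
  intro st hr
  by_contra hgt
  push Not at hgt
  have hR := pvReachN_dist (pvEAug m) ((0, 0), false) st hr
  obtain ⟨y, hRy, hdy⟩ := pvDist_prefix (pvEAug m) ((0, 0), false) st _ hR rfl (k + 1) (by omega)
  obtain ⟨pp, hRk, hfd, hE⟩ := pvDist_pred (pvEAug m) ((0, 0), false) y k ⟨k + 1, hRy⟩ hdy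
  have hpin : pvInb m pp.1 := pvInvInb m h00 k pp hRk
  exact absurd ((hinv.2.2.2 _).mpr ⟨pp.1, pp.2, rfl, hpin, ⟨k, hRk⟩, hfd⟩) (List.not_mem_nil)

theorem pvCardAug (m : List (List Int)) (h00 : pvInb m (0, 0)) (k : Nat)
    (hx : ∃ st, pvReach (pvEAug m) ((0, 0), false) st ∧ pvDist (pvEAug m) ((0, 0), false) st = k) :
    k < 2 * (pvHh m * pvWw m) := by
  obtain ⟨x, hxr, hxd⟩ := hx
  have hpre : ∀ t, t ≤ k → ∃ y, pvInb m y.1 ∧ pvReach (pvEAug m) ((0, 0), false) y ∧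
      pvDist (pvEAug m) ((0, 0), false) y = t := by
    intro t ht
    have hR : pvReachN (pvEAug m) ((0, 0), false) k x := by
      rw [← hxd]; exact pvReachN_dist _ _ _ hxr
    obtain ⟨y, hRy, hdy⟩ := pvDist_prefix (pvEAug m) ((0, 0), false) x k hR hxd t ht
    exact ⟨y, pvInvInb m h00 t y hRy, ⟨t, hRy⟩, hdy⟩
  classical
  have hcard := Finset.card_le_card_of_injOn
    (f := fun t => if h : t ≤ k then Classical.choose (hpre t h)
      else (((0, 0) : Int × Int), false))
    (s := Finset.range (k + 1)) (t := pvCells m ×ˢ (Finset.univ : Finset Bool)) ?_ ?_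
  · rw [Finset.card_range, Finset.card_product, pvCells_card m] at hcard
    simp only [Finset.card_univ, Fintype.card_bool] at hcard
    omega
  · intro t ht
    have ht' : t < k + 1 := by simpa using ht
    simp only []
    rw [dif_pos (by omega : t ≤ k)]
    have hspec := Classical.choose_spec (hpre t (by omega : t ≤ k))
    exact Finset.mem_product.mpr ⟨pvCells_mem m _ hspec.1, Finset.mem_univ _⟩
  · intro t1 ht1 t2 ht2 heq
    have ht1' : t1 < k + 1 := by simpa using ht1
    have ht2' : t2 < k + 1 := by simpa using ht2
    simp only [] at heq
    rw [dif_pos (by omega : t1 ≤ k), dif_pos (by omega : t2 ≤ k)] at heq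
    have hd1 := (Classical.choose_spec (hpre t1 (by omega : t1 ≤ k))).2.2
    have hd2 := (Classical.choose_spec (hpre t2 (by omega : t2 ≤ k))).2.2
    rw [heq] at hd1
    rw [hd1] at hd2
    omega

theorem pvLimitAug (m : List (List Int)) (h00 : pvInb m (0, 0)) :
    ∀ (fuel k : Nat) (d : List (List (Option Int)) × List (List (Option Int)))
      (fr : List (Int × Int × Int)),
      pvInvAug m k d fr → 2 * (pvHh m * pvWw m) + 2 ≤ fuel + k →
      ∀ cc, pvInb m cc → ∀ (j : Bool) (v : Int),
        (pvGet3 (pvLoopAug m (pvHh m : Int) (pvWw m : Int) (pvGoal m) fuel d fr ((k : Int) + 1))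
            (pvBi j) cc.1 cc.2 = some v ↔
          (pvReach (pvEAug m) ((0, 0), false) (cc, j) ∧
            v = (pvDist (pvEAug m) ((0, 0), false) (cc, j) : Int) + 1)) := by
  intro fuel
  induction fuel with
  | zero =>
    intro k d fr hinv hb cc hcc j v
    have hfr : fr = [] := by
      cases fr with
      | nil => rfl
      | cons x t =>
        exfalso
        obtain ⟨cc', j', _, _, hr', hd'⟩ := (hinv.2.2.2 x).mp List.mem_cons_self
        have := pvCardAug m h00 k ⟨(cc', j'), hr', hd'⟩
        omega
    subst hfr
    rw [show pvLoopAug m (pvHh m : Int) (pvWw m : Int) (pvGoal m) 0 d [] ((k : Int) + 1) = d from rfl]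
    rw [hinv.2.2.1 cc hcc j v]
    have hstall := pvStallAug m h00 k d hinv
    constructor
    · rintro ⟨hr, _, hv⟩; exact ⟨hr, hv⟩
    · rintro ⟨hr, hv⟩; exact ⟨hr, hstall (cc, j) hr, hv⟩
  | succ fuel ih =>
    intro k d fr hinv hb cc hcc j v
    cases fr with
    | nil =>
      rw [show pvLoopAug m (pvHh m : Int) (pvWw m : Int) (pvGoal m) (fuel + 1) d [] ((k : Int) + 1)
          = d from rfl]
      rw [hinv.2.2.1 cc hcc j v]
      have hstall := pvStallAug m h00 k d hinv
      constructor
      · rintro ⟨hr, _, hv⟩; exact ⟨hr, hv⟩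
      · rintro ⟨hr, hv⟩; exact ⟨hr, hstall (cc, j) hr, hv⟩
    | cons x rest =>
      have hstep : pvLoopAug m (pvHh m : Int) (pvWw m : Int) (pvGoal m) (fuel + 1) d (x :: rest)
            ((k : Int) + 1)
          = pvLoopAug m (pvHh m : Int) (pvWw m : Int) (pvGoal m) fuel
              ((x :: rest).foldl (pvStepAug m (pvHh m : Int) (pvWw m : Int) (pvGoal m)
                (((k : Int) + 1) + 1)) (d, [])).1
              ((x :: rest).foldl (pvStepAug m (pvHh m : Int) (pvWw m : Int) (pvGoal m)
                (((k : Int) + 1) + 1)) (d, [])).2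
              (((k : Int) + 1) + 1) := rfl
      have hc1 : ((k : Int) + 1) + 1 = (k : Int) + 2 := by ring
      have hc2 : ((k : Int) + 1) + 1 = (((k + 1 : Nat)) : Int) + 1 := by push_cast; ring
      rw [hstep]
      rw [show (((k : Int) + 1) + 1) = ((k : Int) + 2) from hc1]
      have hstep2 := pvInvAug_step m h00 k d (x :: rest) hinv
      have hres := ih (k + 1) _ _ hstep2 (by omega) cc hcc j v
      rw [show (((k + 1 : Nat)) : Int) + 1 = ((k : Int) + 2) from by push_cast; ring] at hres
      exact hres

-- ---------- Part 4: grid characterization of the two loops (statements) ----------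

-- calc_path(s, map): marked cells are exactly the reachable ones, with value dist+1
theorem pvGCA (m : List (List Int)) (s : Int × Int) (hin : pvInb m s) :
    ∀ c, pvInb m c → ∀ v, pvGet2 (pvLvl m s.1 s.2) c.1 c.2 = some v ↔
      (pvReach (pvES m s) s c ∧ v = (pvDist (pvES m s) s c : Int) + 1) :=
  pvGCA_proof m s hin

-- the augmented BFS of Source B: marked states are exactly the reachable ones, with value dist+1
theorem pvGCB (m : List (List Int)) (hH : 0 < pvHh m) (hW : 0 < pvWw m) :
    ∀ c, pvInb m c → ∀ j v,
      pvGet3 (pvLoopAug m (pvHh m : Int) (pvWw m : Int) (pvGoal m) (2 * (pvHh m * pvWw m) + 2)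
          (pvSet3 (List.replicate (pvHh m) (List.replicate (pvWw m) (none : Option Int)),
                   List.replicate (pvHh m) (List.replicate (pvWw m) (none : Option Int))) 0 0 0 1)
          [(0, 0, 0)] 1) (pvBi j) c.1 c.2 = some v ↔
      (pvReach (pvEAug m) ((0, 0), false) (c, j) ∧
        v = (pvDist (pvEAug m) ((0, 0), false) (c, j) : Int) + 1) := by
  have h00 : pvInb m (0, 0) := by
    simp only [pvInb, pvInB]
    omega
  intro c hc j v
  have hshape0 : pvShape (List.replicate (pvHh m) (List.replicate (pvWw m) (none : Option Int)))
      (pvHh m) (pvWw m) := by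
    refine ⟨by simp, ?_⟩
    intro row hrow
    rw [List.eq_of_mem_replicate hrow]
    simp
  have hinv0 : pvInvAug m 0
      (pvSet3 (List.replicate (pvHh m) (List.replicate (pvWw m) (none : Option Int)),
               List.replicate (pvHh m) (List.replicate (pvWw m) (none : Option Int))) 0 0 0 1)
      [(0, 0, 0)] := by
    have hd1 : pvSet3 (List.replicate (pvHh m) (List.replicate (pvWw m) (none : Option Int)),
               List.replicate (pvHh m) (List.replicate (pvWw m) (none : Option Int))) 0 0 0 1
        = (pvSet2 (List.replicate (pvHh m) (List.replicate (pvWw m) (none : Option Int))) 0 0 1,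
           List.replicate (pvHh m) (List.replicate (pvWw m) (none : Option Int))) := rfl
    rw [hd1]
    refine ⟨pvShape_set2 _ _ _ _ _ _ hshape0 h00, hshape0, ?_, ?_⟩
    · intro cc hcc jj vv
      cases jj with
      | false =>
        have hg3 : pvGet3 (pvSet2 (List.replicate (pvHh m)
              (List.replicate (pvWw m) (none : Option Int))) 0 0 1,
            List.replicate (pvHh m) (List.replicate (pvWw m) (none : Option Int)))
            (pvBi false) cc.1 cc.2
            = pvGet2 (pvSet2 (List.replicate (pvHh m)
              (List.replicate (pvWw m) (none : Option Int))) 0 0 1) cc.1 cc.2 := rfl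
        rw [hg3, pvGet2_set2 _ _ _ _ _ _ _ _ hshape0 h00 hcc]
        by_cases heq : (0 : Int) = cc.1 ∧ (0 : Int) = cc.2
        · rw [if_pos heq]
          have hcs : cc = ((0 : Int), (0 : Int)) := Prod.ext heq.1.symm heq.2.symm
          subst hcs
          rw [show pvDist (pvEAug m) ((0, 0), false) ((0, 0), false) = 0 from pvDist_s _ _]
          constructor
          · intro h
            injection h with h'
            exact ⟨⟨0, pvReachN_zero _ _⟩, le_refl _, by omega⟩
          · rintro ⟨_, _, hv⟩
            rw [hv]
            norm_num
        · rw [if_neg heq, pvGet2_blank]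
          constructor
          · intro h; cases h
          · rintro ⟨hr, hle, _⟩
            exfalso
            have hd0 : pvDist (pvEAug m) ((0, 0), false) (cc, false) = 0 := by omega
            have hR0 : pvReachN (pvEAug m) ((0, 0), false) 0 (cc, false) := by
              rw [← hd0]; exact pvReachN_dist _ _ _ hr
            have : cc = ((0 : Int), (0 : Int)) := congrArg Prod.fst (hR0 : _ = _)
            exact heq ⟨(congrArg Prod.fst this).symm, (congrArg Prod.snd this).symm⟩
      | true =>
        have hg3 : pvGet3 (pvSet2 (List.replicate (pvHh m)
              (List.replicate (pvWw m) (none : Option Int))) 0 0 1,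
            List.replicate (pvHh m) (List.replicate (pvWw m) (none : Option Int)))
            (pvBi true) cc.1 cc.2
            = pvGet2 (List.replicate (pvHh m) (List.replicate (pvWw m) (none : Option Int)))
                cc.1 cc.2 := rfl
        rw [hg3, pvGet2_blank]
        constructor
        · intro h; cases h
        · rintro ⟨hr, hle, _⟩
          exfalso
          have hd0 : pvDist (pvEAug m) ((0, 0), false) (cc, true) = 0 := by omega
          have hR0 : pvReachN (pvEAug m) ((0, 0), false) 0 (cc, true) := by
            rw [← hd0]; exact pvReachN_dist _ _ _ hr
          have := congrArg Prod.snd (hR0 : ((cc, true) : (Int × Int) × Bool) = ((0, 0), false))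
          simp at this
    · intro x
      simp only [List.mem_singleton]
      constructor
      · rintro rfl
        exact ⟨(0, 0), false, rfl, h00, ⟨0, pvReachN_zero _ _⟩, pvDist_s _ _⟩
      · rintro ⟨cc, jj, rfl, hcin, hr, hd⟩
        have hR0 : pvReachN (pvEAug m) ((0, 0), false) 0 (cc, jj) := by
          rw [← hd]; exact pvReachN_dist _ _ _ hr
        have hst : ((cc, jj) : (Int × Int) × Bool) = ((0, 0), false) := hR0
        have hcc0 : cc = ((0 : Int), (0 : Int)) := congrArg Prod.fst hst
        have hjj : jj = false := congrArg Prod.snd hst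
        rw [hcc0, hjj]
        rfl
  have hlim := pvLimitAug m h00 (2 * (pvHh m * pvWw m) + 2) 0 _ _ hinv0 (by omega) c hc j v
  norm_num at hlim
  exact hlim

-- ---------- Part 5: the distance identity between the two algorithms ----------

-- states reached with flag 'false' are the start or free cells
theorem pvInv0 (m : List (List Int)) :
    ∀ (n : Nat) (p : Int × Int), pvReachN (pvEAug m) ((0, 0), false) n (p, false) →
      p = (0, 0) ∨ pvFree m p := by
  intro n
  induction n with
  | zero =>
    intro p h
    exact Or.inl (congrArg Prod.fst h)
  | succ n ih =>
    rintro p ⟨x, hx, he⟩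
    rcases he.2.2.2 with ⟨hf, _⟩ | ⟨_, _, hcon⟩
    · exact Or.inr hf
    · exact absurd hcon (by simp)

-- a free-entry walk from the start stays in the broke=false layer
theorem pvL0 (m : List (List Int)) :
    ∀ (t : Nat) (v : Int × Int), pvReachN (pvR m) (0, 0) t v →
      pvReachN (pvEAug m) ((0, 0), false) t (v, false) := by
  intro t
  induction t with
  | zero =>
    intro v h
    rw [show v = ((0 : Int), (0 : Int)) from h]
    rfl
  | succ t ih =>
    rintro v ⟨p, hp, hR⟩
    exact ⟨(p, false), ih p hp, hR.1, hR.2.1, hR.2.2.1, Or.inl ⟨hR.2.2.2, rfl⟩⟩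

-- a forward-BFS walk becomes an augmented walk, breaking at its endpoint if needed
theorem pvL1 (m : List (List Int)) (h00 : pvInb m (0, 0)) :
    ∀ (a : Nat) (c : Int × Int), pvReachN (pvES m (0, 0)) (0, 0) a c →
      (pvFree m c → pvReachN (pvEAug m) ((0, 0), false) a (c, false)) ∧
      (¬ pvFree m c → pvReachN (pvEAug m) ((0, 0), false) a (c, true)) := by
  intro a
  induction a with
  | zero =>
    intro c h
    rw [show c = ((0 : Int), (0 : Int)) from h]
    exact ⟨fun _ => rfl, fun hnf => absurd ⟨h00, Or.inr (Or.inl rfl)⟩ hnf⟩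
  | succ a ih =>
    rintro c ⟨p, hp, he⟩
    obtain ⟨hip, hic, hadj, hop⟩ := he
    have hfp : pvFree m p := by
      rcases hop with rfl | hne
      · exact ⟨hip, Or.inr (Or.inl rfl)⟩
      · exact ⟨hip, Or.inl hne⟩
    have hA := (ih p hp).1 hfp
    constructor
    · intro hfc
      exact ⟨(p, false), hA, hip, hic, hadj, Or.inl ⟨hfc, rfl⟩⟩
    · intro hnfc
      exact ⟨(p, false), hA, hip, hic, hadj, Or.inr ⟨hnfc, rfl, rfl⟩⟩

-- a backward-BFS walk, reversed, extends any augmented walk to the goal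
theorem pvL2 (m : List (List Int)) :
    ∀ (b : Nat) (c : Int × Int), pvReachN (pvES m (pvGoal m)) (pvGoal m) b c →
      ∀ (n : Nat) (j : Bool), pvReachN (pvEAug m) ((0, 0), false) n (c, j) →
        pvReachN (pvEAug m) ((0, 0), false) (n + b) (pvGoal m, j) := by
  intro b
  induction b with
  | zero =>
    intro c h n j hA
    rw [show c = pvGoal m from h] at hA
    simpa using hA
  | succ b ih =>
    rintro c ⟨p, hp, he⟩ n j hA
    obtain ⟨hip, hic, hadj, hop⟩ := he
    have hfp : pvFree m p := by
      rcases hop with rfl | hne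
      · exact ⟨hip, Or.inr (Or.inr rfl)⟩
      · exact ⟨hip, Or.inl hne⟩
    have hstep : pvReachN (pvEAug m) ((0, 0), false) (n + 1) (p, j) :=
      ⟨(c, j), hA, hic, hip, pvAdj_symm p c hadj, Or.inl ⟨hfp, rfl⟩⟩
    have := ih p hp (n + 1) j hstep
    have harit : n + 1 + b = n + (b + 1) := by omega
    rwa [harit] at this

-- an augmented walk in the broke=false layer is a forward-BFS walk, unless it met the goal earlier
theorem pvK1 (m : List (List Int)) :
    ∀ (n : Nat) (c : Int × Int), pvReachN (pvEAug m) ((0, 0), false) n (c, false) →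
      pvReachN (pvES m (0, 0)) (0, 0) n c ∨
        ∃ t < n, pvReachN (pvEAug m) ((0, 0), false) t (pvGoal m, false) := by
  intro n
  induction n with
  | zero =>
    intro c h
    exact Or.inl (congrArg Prod.fst h)
  | succ n ih =>
    rintro c ⟨x, hx, he⟩
    have hx2 : x.2 = false := by
      rcases he.2.2.2 with ⟨_, h2⟩ | ⟨_, _, hcon⟩
      · exact h2.symm
      · exact absurd hcon (by simp)
    obtain ⟨p, jp⟩ := x
    simp only at hx2
    subst hx2
    rcases ih p hx with hF | ⟨t, ht, hbad⟩
    · have hinv := pvInv0 m n p hx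
      have hcase : p = (0, 0) ∨ pvMapGet m p.1 p.2 ≠ 1 ∨ (p = pvGoal m) := by
        rcases hinv with rfl | ⟨_, hf⟩
        · exact Or.inl rfl
        · rcases hf with h | h | h
          · exact Or.inr (Or.inl h)
          · exact Or.inl h
          · exact Or.inr (Or.inr h)
      rcases hcase with hs | hne | hgg
      · exact Or.inl ⟨p, hF, he.1, he.2.1, he.2.2.1, Or.inl hs⟩
      · exact Or.inl ⟨p, hF, he.1, he.2.1, he.2.2.1, Or.inr hne⟩
      · subst hgg
        exact Or.inr ⟨n, by omega, hx⟩
    · exact Or.inr ⟨t, by omega, hbad⟩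

-- an augmented walk in the broke=true layer splits at the broken wall
theorem pvK2 (m : List (List Int)) :
    ∀ (n : Nat) (c : Int × Int), pvReachN (pvEAug m) ((0, 0), false) n (c, true) →
      ∃ w k j, k + 1 + j = n ∧ ¬ pvFree m w ∧
        (∃ p, pvReachN (pvEAug m) ((0, 0), false) k (p, false) ∧ pvEAug m (p, false) (w, true)) ∧
        pvReachN (pvR m) w j c := by
  intro n
  induction n with
  | zero =>
    intro c h
    exact absurd (congrArg Prod.snd h) (by simp)
  | succ n ih =>
    rintro c ⟨x, hx, he⟩
    rcases he.2.2.2 with ⟨hfc, h2⟩ | ⟨hnfc, hx2, _⟩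
    · -- free entry: extend the free-walk suffix
      obtain ⟨p, jp⟩ := x
      simp only at h2
      subst h2
      obtain ⟨w, k, j, hsum, hnf, hbreak, hRw⟩ := ih p hx
      exact ⟨w, k, j + 1, by omega, hnf, hbreak,
        ⟨p, hRw, he.1, he.2.1, he.2.2.1, hfc⟩⟩
    · -- the break happens right here
      obtain ⟨p, jp⟩ := x
      simp only at hx2
      subst hx2
      exact ⟨c, n, 0, by omega, hnfc, ⟨p, hx, he⟩, rfl⟩

-- a reversed free-entry walk from the goal is a backward-BFS walk, unless it ran through the start wall
theorem pvK4 (m : List (List Int)) :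
    ∀ (j : Nat) (v : Int × Int), pvReachN (fun a b => pvR m b a) (pvGoal m) j v →
      pvReachN (pvES m (pvGoal m)) (pvGoal m) j v ∨
        ∃ t < j, pvReachN (pvEAug m) ((0, 0), false) t (pvGoal m, false) := by
  intro j
  induction j with
  | zero =>
    intro v h
    exact Or.inl h
  | succ j ih =>
    rintro v ⟨u, hu, hR⟩
    obtain ⟨hiv, hiu, hadj, hfu⟩ := hR
    rcases ih u hu with hEB | ⟨t, ht, hbad⟩
    · by_cases hok : u = pvGoal m ∨ pvMapGet m u.1 u.2 ≠ 1
      · exact Or.inl ⟨u, hEB, hiu, hiv, pvAdj_symm v u hadj, hok⟩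
      · push Not at hok
        have hu0 : u = (0, 0) := by
          rcases hfu.2 with h | h | h
          · exact absurd hok.2 h
          · exact h
          · exact absurd h hok.1
        have hrev := pvReachN_rev (pvES m (pvGoal m)) (pvGoal m) j u hEB
        have hRfrom : pvReachN (pvR m) u j (pvGoal m) := by
          refine pvReachN_mono _ _ ?_ u j (pvGoal m) hrev
          rintro a b ⟨hib, hia, hadj2, hopb⟩
          refine ⟨hia, hib, pvAdj_symm b a hadj2, hib, ?_⟩
          rcases hopb with rfl | hne
          · exact Or.inr (Or.inr rfl)
          · exact Or.inl hne
        rw [hu0] at hRfrom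
        exact Or.inr ⟨j, by omega, pvL0 m j (pvGoal m) hRfrom⟩
    · exact Or.inr ⟨t, by omega, hbad⟩

-- every cell both BFS maps reach yields an augmented walk to the goal of the combined length
theorem pvDir2 (m : List (List Int)) (h00 : pvInb m (0, 0)) :
    ∀ (c : Int × Int), pvInb m c →
      pvReach (pvES m (0, 0)) (0, 0) c → pvReach (pvES m (pvGoal m)) (pvGoal m) c →
      ∃ jj, pvReach (pvEAug m) ((0, 0), false) (pvGoal m, jj) ∧
        pvDist (pvEAug m) ((0, 0), false) (pvGoal m, jj)
          ≤ pvDist (pvES m (0, 0)) (0, 0) c + pvDist (pvES m (pvGoal m)) (pvGoal m) c := by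
  intro c hc hf hb
  have hFa := pvReachN_dist (pvES m (0, 0)) (0, 0) c hf
  have hBb := pvReachN_dist (pvES m (pvGoal m)) (pvGoal m) c hb
  by_cases hfc : pvFree m c
  · have hA := (pvL1 m h00 _ c hFa).1 hfc
    have hG := pvL2 m _ c hBb _ false hA
    exact ⟨false, ⟨_, hG⟩, pvDist_le _ _ _ _ hG⟩
  · have hA := (pvL1 m h00 _ c hFa).2 hfc
    have hG := pvL2 m _ c hBb _ true hA
    exact ⟨true, ⟨_, hG⟩, pvDist_le _ _ _ _ hG⟩

-- a shortest augmented walk to the goal yields a cell both BFS maps reach, of combined length ≤ it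
theorem pvDir1 (m : List (List Int)) (h00 : pvInb m (0, 0)) (jj : Bool)
    (hex : pvReach (pvEAug m) ((0, 0), false) (pvGoal m, jj)) :
    ∃ c, pvInb m c ∧ pvReach (pvES m (0, 0)) (0, 0) c ∧ pvReach (pvES m (pvGoal m)) (pvGoal m) c ∧
      pvDist (pvES m (0, 0)) (0, 0) c + pvDist (pvES m (pvGoal m)) (pvGoal m) c
        ≤ sInf {n | ∃ j, pvReachN (pvEAug m) ((0, 0), false) n (pvGoal m, j)} := by
  obtain ⟨nj, hnj⟩ := hex
  have hSne : {n | ∃ j, pvReachN (pvEAug m) ((0, 0), false) n (pvGoal m, j)}.Nonempty :=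
    ⟨nj, jj, hnj⟩
  set N := sInf {n | ∃ j, pvReachN (pvEAug m) ((0, 0), false) n (pvGoal m, j)} with hNdef
  obtain ⟨jN, hRN⟩ := Nat.sInf_mem hSne
  have hmin : ∀ t < N, ∀ j : Bool, ¬ pvReachN (pvEAug m) ((0, 0), false) t (pvGoal m, j) := by
    intro t ht j hcon
    have hmem : t ∈ {n | ∃ j, pvReachN (pvEAug m) ((0, 0), false) n (pvGoal m, j)} := ⟨j, hcon⟩
    have := Nat.sInf_le hmem
    omega
  cases jN with
  | false =>
    rcases pvK1 m N (pvGoal m) hRN with hF | ⟨t, ht, hbad⟩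
    · refine ⟨pvGoal m, pvInvInb m h00 N _ hRN, ⟨N, hF⟩, ⟨0, pvReachN_zero _ _⟩, ?_⟩
      have h1 := pvDist_le (pvES m (0, 0)) (0, 0) (pvGoal m) N hF
      have h2 := pvDist_le (pvES m (pvGoal m)) (pvGoal m) (pvGoal m) 0 (pvReachN_zero _ _)
      omega
    · exact absurd hbad (hmin t ht false)
  | true =>
    obtain ⟨w, k, j, hsum, hnf, ⟨p, hp, hedge⟩, hRwj⟩ := pvK2 m N (pvGoal m) hRN
    -- forward part: a walk of length k+1 to w
    have hFw : pvReachN (pvES m (0, 0)) (0, 0) (k + 1) w := by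
      rcases pvK1 m k p hp with hFp | ⟨t, ht, hbad⟩
      · have hinv := pvInv0 m k p hp
        have hop : pvOpenS m (0, 0) p := by
          rcases hinv with rfl | ⟨_, hf⟩
          · exact Or.inl rfl
          · rcases hf with h | h | h
            · exact Or.inr h
            · exact Or.inl h
            · exfalso
              rw [h] at hp
              exact hmin k (by omega) false hp
        exact ⟨p, hFp, hedge.1, hedge.2.1, hedge.2.2.1, hop⟩
      · exact absurd hbad (hmin t (by omega) false)
    -- backward part: a walk of length j from the goal to w
    have hBw : pvReachN (pvES m (pvGoal m)) (pvGoal m) j w := by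
      have hrev := pvReachN_rev (pvR m) w j (pvGoal m) hRwj
      rcases pvK4 m j w hrev with hEB | ⟨t, ht, hbad⟩
      · exact hEB
      · exact absurd hbad (hmin t (by omega) false)
    refine ⟨w, hedge.2.1, ⟨k + 1, hFw⟩, ⟨j, hBw⟩, ?_⟩
    have h1 := pvDist_le (pvES m (0, 0)) (0, 0) w (k + 1) hFw
    have h2 := pvDist_le (pvES m (pvGoal m)) (pvGoal m) w j hBw
    omega

-- ---------- Part 6: assembly helpers ----------

-- a nested index fold is the fold over the flattened pair list
theorem pvFoldFlat {σ α β : Type} (g : σ → α → β → σ) :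
    ∀ (l1 : List α) (l2 : List β) (init : σ),
      l1.foldl (fun acc i => l2.foldl (fun acc2 j => g acc2 i j) acc) init
        = (l1.flatMap (fun i => l2.map (fun j => (i, j)))).foldl (fun acc p => g acc p.1 p.2) init := by
  intro l1
  induction l1 with
  | nil => intro l2 init; rfl
  | cons a t ih =>
    intro l2 init
    rw [List.foldl_cons, List.flatMap_cons, List.foldl_append, List.foldl_map, ih]

-- characterization of a guarded min-fold
theorem pvFoldMin {α : Type} (P : α → Bool) (f : α → Int) :
    ∀ (l : List α) (a0 : Int),
      (∀ x ∈ l, P x → l.foldl (fun acc x => if P x then min (f x) acc else acc) a0 ≤ f x) ∧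
      l.foldl (fun acc x => if P x then min (f x) acc else acc) a0 ≤ a0 ∧
      (l.foldl (fun acc x => if P x then min (f x) acc else acc) a0 = a0 ∨
        ∃ x ∈ l, P x ∧ l.foldl (fun acc x => if P x then min (f x) acc else acc) a0 = f x) := by
  intro l
  induction l with
  | nil => intro a0; exact ⟨by simp, le_refl _, Or.inl rfl⟩
  | cons a t ih =>
    intro a0
    rw [List.foldl_cons]
    by_cases hPa : P a
    · rw [if_pos hPa]
      obtain ⟨ih1, ih2, ih3⟩ := ih (min (f a) a0)
      refine ⟨?_, le_trans ih2 (min_le_right _ _), ?_⟩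
      · intro x hx hPx
        rcases List.mem_cons.mp hx with rfl | hx'
        · exact le_trans ih2 (min_le_left _ _)
        · exact ih1 x hx' hPx
      · rcases ih3 with h | ⟨x, hx, hPx, hv⟩
        · rcases min_cases (f a) a0 with ⟨he, _⟩ | ⟨he, _⟩
          · exact Or.inr ⟨a, List.mem_cons_self, hPa, by rw [h, he]⟩
          · exact Or.inl (by rw [h, he])
        · exact Or.inr ⟨x, List.mem_cons_of_mem _ hx, hPx, hv⟩
    · rw [if_neg hPa]
      obtain ⟨ih1, ih2, ih3⟩ := ih a0
      refine ⟨?_, ih2, ?_⟩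
      · intro x hx hPx
        rcases List.mem_cons.mp hx with rfl | hx'
        · exact absurd hPx hPa
        · exact ih1 x hx' hPx
      · rcases ih3 with h | ⟨x, hx, hPx, hv⟩
        · exact Or.inl h
        · exact Or.inr ⟨x, List.mem_cons_of_mem _ hx, hPx, hv⟩

-- ---------- Part 6b: reading the characterizations ----------

theorem pvGCA_some (m : List (List Int)) (s : Int × Int) (hin : pvInb m s)
    (c : Int × Int) (hc : pvInb m c) (hr : pvReach (pvES m s) s c) :
    pvGet2 (pvLvl m s.1 s.2) c.1 c.2 = some ((pvDist (pvES m s) s c : Int) + 1) :=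
  ((pvGCA m s hin c hc _).mpr ⟨hr, rfl⟩)

theorem pvGCA_none (m : List (List Int)) (s : Int × Int) (hin : pvInb m s)
    (c : Int × Int) (hc : pvInb m c) (hr : ¬ pvReach (pvES m s) s c) :
    pvGet2 (pvLvl m s.1 s.2) c.1 c.2 = none := by
  cases hv : pvGet2 (pvLvl m s.1 s.2) c.1 c.2 with
  | none => rfl
  | some v => exact absurd ((pvGCA m s hin c hc v).mp hv).1 hr

theorem pvTruthy_dist (d : Nat) : pvTruthy (some ((d : Int) + 1)) = true := by
  simp [pvTruthy]
  omega

theorem pvTruthy_none : pvTruthy none = false := rfl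

theorem pvMemFlat (m : List (List Int)) (x : Int × Int) :
    x ∈ (PySem.List.pyRange 0 (pvHh m : Int) 1).flatMap
        (fun i => (PySem.List.pyRange 0 (pvWw m : Int) 1).map (fun j => (i, j))) ↔ pvInb m x := by
  simp only [List.mem_flatMap, List.mem_map, PySem.List.mem_pyRange_one, pvInb, pvInB]
  constructor
  · rintro ⟨i, ⟨hi0, hi1⟩, j, ⟨hj0, hj1⟩, rfl⟩
    exact ⟨hi0, hi1, hj0, hj1⟩
  · rintro ⟨h1, h2, h3, h4⟩
    exact ⟨x.1, ⟨h1, h2⟩, x.2, ⟨h3, h4⟩, rfl⟩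

-- characterization of A's returned value
theorem pvAchar (m : List (List Int))
    (h00 : pvInb m (0, 0)) (hg : pvInb m (pvGoal m)) :
    (∀ c, pvInb m c → pvReach (pvES m (0, 0)) (0, 0) c → pvReach (pvES m (pvGoal m)) (pvGoal m) c →
      solution m ≤ (pvDist (pvES m (0, 0)) (0, 0) c : Int) + (pvDist (pvES m (pvGoal m)) (pvGoal m) c : Int) + 1) ∧
    solution m ≤ 4294967295 ∧
    (solution m = 4294967295 ∨ ∃ c, pvInb m c ∧ pvReach (pvES m (0, 0)) (0, 0) c ∧
      pvReach (pvES m (pvGoal m)) (pvGoal m) c ∧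
      solution m = (pvDist (pvES m (0, 0)) (0, 0) c : Int) + (pvDist (pvES m (pvGoal m)) (pvGoal m) c : Int) + 1) := by
  have e1 : pvCalcPath (0, 0) m = pvLvl m 0 0 := pvCalcPath_eq_lvl m (0, 0) h00
  have e2 : pvCalcPath ((m.length : Int) - 1, (((m[0]?).getD []).length : Int) - 1) m
      = pvLvl m (pvGoal m).1 (pvGoal m).2 := pvCalcPath_eq_lvl m _ hg
  have hsolA : solution m
      = ((PySem.List.pyRange 0 (pvHh m : Int) 1).flatMap
          (fun i => (PySem.List.pyRange 0 (pvWw m : Int) 1).map (fun j => (i, j)))).foldl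
          (fun acc p =>
            if pvTruthy (pvGet2 (pvLvl m 0 0) p.1 p.2)
                && pvTruthy (pvGet2 (pvLvl m (pvGoal m).1 (pvGoal m).2) p.1 p.2) then
              min ((pvGet2 (pvLvl m 0 0) p.1 p.2).getD 0
                    + (pvGet2 (pvLvl m (pvGoal m).1 (pvGoal m).2) p.1 p.2).getD 0 - 1) acc
            else acc) 4294967295 := by
    simp only [solution, pvHh, pvWw]
    rw [e1, e2]
    exact pvFoldFlat _ _ _ _
  have hfm := pvFoldMin
    (fun p : Int × Int => pvTruthy (pvGet2 (pvLvl m 0 0) p.1 p.2)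
        && pvTruthy (pvGet2 (pvLvl m (pvGoal m).1 (pvGoal m).2) p.1 p.2))
    (fun p : Int × Int => (pvGet2 (pvLvl m 0 0) p.1 p.2).getD 0
        + (pvGet2 (pvLvl m (pvGoal m).1 (pvGoal m).2) p.1 p.2).getD 0 - 1)
    ((PySem.List.pyRange 0 (pvHh m : Int) 1).flatMap
          (fun i => (PySem.List.pyRange 0 (pvWw m : Int) 1).map (fun j => (i, j)))) 4294967295
  simp only [] at hfm
  rw [← hsolA] at hfm
  obtain ⟨hub, ha0, hval⟩ := hfm
  refine ⟨?_, ha0, ?_⟩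
  · intro c hc hrf hrb
    have h1 := hub c ((pvMemFlat m c).mpr hc)
    rw [pvGCA_some m (0, 0) h00 c hc hrf, pvGCA_some m (pvGoal m) hg c hc hrb] at h1
    simp only [pvTruthy_dist, Bool.and_self, Option.getD_some, forall_const] at h1
    omega
  · rcases hval with h | ⟨x, hx, hPx, hvx⟩
    · exact Or.inl h
    · right
      have hxin : pvInb m x := (pvMemFlat m x).mp hx
      have hrf : pvReach (pvES m (0, 0)) (0, 0) x := by
        by_contra hno
        rw [pvGCA_none m (0, 0) h00 x hxin hno] at hPx
        simp [pvTruthy] at hPx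
      have hrb : pvReach (pvES m (pvGoal m)) (pvGoal m) x := by
        by_contra hno
        rw [pvGCA_none m (pvGoal m) hg x hxin hno] at hPx
        simp [pvTruthy] at hPx
      refine ⟨x, hxin, hrf, hrb, ?_⟩
      rw [pvGCA_some m (0, 0) h00 x hxin hrf, pvGCA_some m (pvGoal m) hg x hxin hrb] at hvx
      simp only [Option.getD_some] at hvx
      rw [hvx]
      ring

-- characterization of B's returned value
theorem pvBchar (m : List (List Int)) (hH : 0 < pvHh m) (hW : 0 < pvWw m) (hg : pvInb m (pvGoal m)) :
    (∀ j : Bool, pvReach (pvEAug m) ((0, 0), false) (pvGoal m, j) →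
      solution_alt m ≤ (pvDist (pvEAug m) ((0, 0), false) (pvGoal m, j) : Int) + 1) ∧
    solution_alt m ≤ 4294967295 ∧
    (solution_alt m = 4294967295 ∨ ∃ j : Bool, pvReach (pvEAug m) ((0, 0), false) (pvGoal m, j) ∧
      solution_alt m = (pvDist (pvEAug m) ((0, 0), false) (pvGoal m, j) : Int) + 1) := by
  have hB := pvGCB m hH hW (pvGoal m) hg
  have hBsome : ∀ j : Bool, pvReach (pvEAug m) ((0, 0), false) (pvGoal m, j) →
      pvGet3 (pvLoopAug m (pvHh m : Int) (pvWw m : Int) (pvGoal m) (2 * (pvHh m * pvWw m) + 2)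
          (pvSet3 (List.replicate (pvHh m) (List.replicate (pvWw m) (none : Option Int)),
                   List.replicate (pvHh m) (List.replicate (pvWw m) (none : Option Int))) 0 0 0 1)
          [(0, 0, 0)] 1) (pvBi j) (pvGoal m).1 (pvGoal m).2
        = some ((pvDist (pvEAug m) ((0, 0), false) (pvGoal m, j) : Int) + 1) :=
    fun j hj => (hB j _).mpr ⟨hj, rfl⟩
  have hBnone : ∀ j : Bool, ¬ pvReach (pvEAug m) ((0, 0), false) (pvGoal m, j) →
      pvGet3 (pvLoopAug m (pvHh m : Int) (pvWw m : Int) (pvGoal m) (2 * (pvHh m * pvWw m) + 2)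
          (pvSet3 (List.replicate (pvHh m) (List.replicate (pvWw m) (none : Option Int)),
                   List.replicate (pvHh m) (List.replicate (pvWw m) (none : Option Int))) 0 0 0 1)
          [(0, 0, 0)] 1) (pvBi j) (pvGoal m).1 (pvGoal m).2 = none := by
    intro j hj
    cases hv : pvGet3 (pvLoopAug m (pvHh m : Int) (pvWw m : Int) (pvGoal m) (2 * (pvHh m * pvWw m) + 2)
          (pvSet3 (List.replicate (pvHh m) (List.replicate (pvWw m) (none : Option Int)),
                   List.replicate (pvHh m) (List.replicate (pvWw m) (none : Option Int))) 0 0 0 1)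
          [(0, 0, 0)] 1) (pvBi j) (pvGoal m).1 (pvGoal m).2 with
    | none => rfl
    | some v => exact absurd ((hB j v).mp hv).1 hj
  have hsolB : solution_alt m
      = [(0 : Int), 1].foldl
          (fun acc b =>
            if pvTruthy (pvGet3 (pvLoopAug m (pvHh m : Int) (pvWw m : Int) (pvGoal m)
                (2 * (pvHh m * pvWw m) + 2)
                (pvSet3 (List.replicate (pvHh m) (List.replicate (pvWw m) (none : Option Int)),
                         List.replicate (pvHh m) (List.replicate (pvWw m) (none : Option Int))) 0 0 0 1)
                [(0, 0, 0)] 1) b (pvGoal m).1 (pvGoal m).2) then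
              min acc ((pvGet3 (pvLoopAug m (pvHh m : Int) (pvWw m : Int) (pvGoal m)
                (2 * (pvHh m * pvWw m) + 2)
                (pvSet3 (List.replicate (pvHh m) (List.replicate (pvWw m) (none : Option Int)),
                         List.replicate (pvHh m) (List.replicate (pvWw m) (none : Option Int))) 0 0 0 1)
                [(0, 0, 0)] 1) b (pvGoal m).1 (pvGoal m).2).getD 0)
            else acc) 4294967295 := by
    simp only [solution_alt, pvHh, pvWw, pvGoal]
  rw [hsolB]
  simp only [List.foldl_cons, List.foldl_nil]
  by_cases hr0 : pvReach (pvEAug m) ((0, 0), false) (pvGoal m, false) <;>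
    by_cases hr1 : pvReach (pvEAug m) ((0, 0), false) (pvGoal m, true)
  · have hs0 := hBsome false hr0
    have hs1 := hBsome true hr1
    norm_num [pvBi] at hs0 hs1
    rw [hs0, hs1]
    simp only [pvTruthy_dist, if_true, Option.getD_some]
    refine ⟨?_, le_trans (min_le_left _ _) (min_le_left _ _), ?_⟩
    · intro j hj
      cases j
      · exact le_trans (min_le_left _ _) (min_le_right _ _)
      · exact min_le_right _ _
    · rcases min_cases (min (4294967295 : Int)
          ((pvDist (pvEAug m) ((0, 0), false) (pvGoal m, false) : Int) + 1))
          ((pvDist (pvEAug m) ((0, 0), false) (pvGoal m, true) : Int) + 1) with ⟨he, _⟩ | ⟨he, _⟩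
      · rcases min_cases (4294967295 : Int)
            ((pvDist (pvEAug m) ((0, 0), false) (pvGoal m, false) : Int) + 1) with ⟨he2, _⟩ | ⟨he2, _⟩
        · exact Or.inl (by rw [he, he2])
        · exact Or.inr ⟨false, hr0, by rw [he, he2]⟩
      · exact Or.inr ⟨true, hr1, he⟩
  · have hs0 := hBsome false hr0
    have hs1 := hBnone true hr1
    norm_num [pvBi] at hs0 hs1
    rw [hs0, hs1]
    simp only [pvTruthy_dist, pvTruthy_none, Bool.false_eq_true, if_true, if_false, Option.getD_some]
    refine ⟨?_, min_le_left _ _, ?_⟩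
    · intro j hj
      cases j
      · exact min_le_right _ _
      · exact absurd hj hr1
    · rcases min_cases (4294967295 : Int)
          ((pvDist (pvEAug m) ((0, 0), false) (pvGoal m, false) : Int) + 1) with ⟨he, _⟩ | ⟨he, _⟩
      · exact Or.inl he
      · exact Or.inr ⟨false, hr0, he⟩
  · have hs0 := hBnone false hr0
    have hs1 := hBsome true hr1
    norm_num [pvBi] at hs0 hs1
    rw [hs0, hs1]
    simp only [pvTruthy_dist, pvTruthy_none, Bool.false_eq_true, if_true, if_false, Option.getD_some]
    refine ⟨?_, min_le_left _ _, ?_⟩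
    · intro j hj
      cases j
      · exact absurd hj hr0
      · exact min_le_right _ _
    · rcases min_cases (4294967295 : Int)
          ((pvDist (pvEAug m) ((0, 0), false) (pvGoal m, true) : Int) + 1) with ⟨he, _⟩ | ⟨he, _⟩
      · exact Or.inl he
      · exact Or.inr ⟨true, hr1, he⟩
  · have hs0 := hBnone false hr0
    have hs1 := hBnone true hr1
    norm_num [pvBi] at hs0 hs1
    rw [hs0, hs1]
    simp only [pvTruthy_none, Bool.false_eq_true, if_false]
    refine ⟨?_, le_refl _, Or.inl (by trivial)⟩
    intro j hj
    cases j
    · exact absurd hj hr0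
    · exact absurd hj hr1

-- ===== VERDICT (by name: the statement is the Claim_ definition above) =====
theorem solution_spec : Claim_equal_solution := by
  intro map _ hpre
  unfold Spec_solution
  obtain ⟨hne, hwpos0, hrows⟩ := hpre
  have hH : 0 < pvHh map := List.length_pos_iff.mpr hne
  have hhead : map.headD [] = (map[0]?).getD [] := by
    cases map with
    | nil => exact absurd rfl hne
    | cons r t => simp
  have hW : 0 < pvWw map := by
    simp only [pvWw, ← hhead]
    exact hwpos0
  have h00 : pvInb map (0, 0) := by
    simp only [pvInb, pvInB]
    omega
  have hg : pvInb map (pvGoal map) := by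
    simp only [pvInb, pvInB, pvGoal]
    omega
  obtain ⟨hAub, hAa0, hAval⟩ := pvAchar map h00 hg
  obtain ⟨hBub, hBa0, hBval⟩ := pvBchar map hH hW hg
  -- S and its infimum
  have hNle : ∀ j : Bool, pvReach (pvEAug map) ((0, 0), false) (pvGoal map, j) →
      sInf {n | ∃ j', pvReachN (pvEAug map) ((0, 0), false) n (pvGoal map, j')}
        ≤ pvDist (pvEAug map) ((0, 0), false) (pvGoal map, j) := by
    intro j hj
    exact Nat.sInf_le ⟨j, pvReachN_dist _ _ _ hj⟩
  apply le_antisymm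
  · -- solution ≤ solution_alt
    rcases hBval with hB | ⟨j, hjr, hBv⟩
    · rw [hB]; exact hAa0
    · obtain ⟨c, hcin, hcf, hcb, hcd⟩ := pvDir1 map h00 j hjr
      have h1 := hAub c hcin hcf hcb
      have h2 := hNle j hjr
      rw [hBv]
      have := hcd.trans h2
      omega
  · -- solution_alt ≤ solution
    rcases hAval with hA | ⟨c, hcin, hcf, hcb, hAv⟩
    · rw [hA]; exact hBa0
    · obtain ⟨jj, hjjr, hjd⟩ := pvDir2 map h00 c hcin hcf hcb
      have h1 := hBub jj hjjr
      rw [hAv]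
      omega
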